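-- pv_equiv track=rewrite | github.com/grapheneaffiliate/h4-polytopic-attention | solve_arc2_train_ad.py | solve_9720b24f
-- ===== SOURCE A (Python) =====
-- from collections import Counter, defaultdict
--
-- def solve_9720b24f(grid):
--     """Remove foreign-color components inside shape outlines.
--     Use total color count to determine which is outline vs marker."""
--     R,C=len(grid),len(grid[0])
--     out=[r[:] for r in grid]
--     # Count total cells per color
--     color_count=Counter()
--     for r in range(R):
--         for c in range(C):
--             if grid[r][c]!=0: color_count[grid[r][c]]+=1
--     # Find connected components
--     vis=[[False]*C for _ in range(R)]
--     components=[]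
--     cell_to_comp={}
--     for r in range(R):
--         for c in range(C):
--             if grid[r][c]!=0 and not vis[r][c]:
--                 col=grid[r][c]
--                 q=[(r,c)]; vis[r][c]=True; cells=set(); cells.add((r,c))
--                 while q:
--                     cr,cc=q.pop(0)
--                     for nr,nc in [(cr-1,cc),(cr+1,cc),(cr,cc-1),(cr,cc+1)]:
--                         if 0<=nr<R and 0<=nc<C and not vis[nr][nc] and grid[nr][nc]==col:
--                             vis[nr][nc]=True; cells.add((nr,nc)); q.append((nr,nc))
--                 idx=len(components)
--                 components.append((col,cells))
--                 for cell in cells: cell_to_comp[cell]=idx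
--     # For each component, check adjacency
--     for idx,(col,cells) in enumerate(components):
--         adj_comp_idxs=set()
--         for r,c in cells:
--             for nr,nc in [(r-1,c),(r+1,c),(r,c-1),(r,c+1)]:
--                 if (nr,nc) in cell_to_comp and cell_to_comp[(nr,nc)]!=idx:
--                     adj_comp_idxs.add(cell_to_comp[(nr,nc)])
--         if adj_comp_idxs:
--             adj_colors=set(components[i][0] for i in adj_comp_idxs)
--             if len(adj_colors)==1:
--                 adj_col=list(adj_colors)[0]
--                 if adj_col!=col and color_count[adj_col]>color_count[col]:
--                     for r,c in cells: out[r][c]=0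
--         else:
--             # Not adjacent to any other component. Check if inside a shape's bbox.
--             # Use color with most cells as potential encloser
--             for oidx,(ocol,ocells) in enumerate(components):
--                 if ocol==col: continue
--                 if color_count[ocol]<=color_count[col]: continue
--                 # Use all cells of that color combined
--                 all_ocol=set()
--                 for oi,(oc,ocs) in enumerate(components):
--                     if oc==ocol: all_ocol.update(ocs)
--                 mr=min(r for r,c in all_ocol); Mr=max(r for r,c in all_ocol)
--                 mc=min(c for r,c in all_ocol); Mc=max(c for r,c in all_ocol)
--                 if all(mr<=r<=Mr and mc<=c<=Mc for r,c in cells):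
--                     for r,c in cells: out[r][c]=0
--                     break
--     return out
-- ===== SOURCE B (Python) =====
-- from collections import deque, defaultdict, Counter
--
-- def solve_9720b24f(grid):
--     """Remove foreign-color components inside shape outlines.
--     Staged pipeline: label components into a comp-id grid with deque BFS,
--     precompute per-color cell pools and bounding boxes once, classify the
--     doomed components purely (collecting their cells), then erase them in
--     a single final pass."""
--     R, C = len(grid), len(grid[0])
--
--     def inside(r, c):
--         return 0 <= r < R and 0 <= c < C
--
--     count = Counter(row[c] for row in grid for c in range(C) if row[c] != 0)
--     comp = [[-1] * C for _ in range(R)]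
--     comps = []
--     for r, row in enumerate(grid):
--         for c in range(C):
--             if row[c] != 0 and comp[r][c] == -1:
--                 col, idx = row[c], len(comps)
--                 q = deque([(r, c)])
--                 comp[r][c] = idx
--                 cells = [(r, c)]
--                 while q:
--                     cr, cc = q.popleft()
--                     for dr, dc in ((-1, 0), (1, 0), (0, -1), (0, 1)):
--                         nr, nc = cr + dr, cc + dc
--                         if inside(nr, nc) and comp[nr][nc] == -1 and grid[nr][nc] == col:
--                             comp[nr][nc] = idx
--                             cells.append((nr, nc))
--                             q.append((nr, nc))
--                 comps.append((col, cells))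
--     pool = defaultdict(list)
--     for col, cells in comps:
--         pool[col].extend(cells)
--     bbox = {col: (min(r for r, _ in s), max(r for r, _ in s),
--                   min(c for _, c in s), max(c for _, c in s))
--             for col, s in pool.items()}
--     dead = []
--     for idx, (col, cells) in enumerate(comps):
--         nbr = set()
--         for r, c in cells:
--             for dr, dc in ((-1, 0), (1, 0), (0, -1), (0, 1)):
--                 nr, nc = r + dr, c + dc
--                 if inside(nr, nc) and grid[nr][nc] != 0 and comp[nr][nc] != idx:
--                     nbr.add(comp[nr][nc])
--         if nbr:
--             ncols = {comps[i][0] for i in nbr}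
--             if len(ncols) == 1:
--                 acol = next(iter(ncols))
--                 if acol != col and count[acol] > count[col]:
--                     dead.extend(cells)
--         elif any(ocol != col and count[ocol] > count[col] and
--                  all(mr <= r <= Mr and mc <= c <= Mc for r, c in cells)
--                  for ocol, (mr, Mr, mc, Mc) in bbox.items()):
--             dead.extend(cells)
--     out = [row[:] for row in grid]
--     for r, c in dead:
--         out[r][c] = 0
--     return out
-- ===== Notes on version B (the rewrite author's own statement) =====
-- stated objective: alternative
-- what changed: B is a staged pipeline: deque BFS labels components into a single component-id grid (instead of A's visited array, list.pop(0) queue and cell->component dict), per-colour cell pools and bounding boxes are precomputed once (instead of A's per-candidate recomputation of the colour union and bbox), the doomed components are classified purely into a dead-cell list, and one final pass erases them (instead of A's interleaved in-place zeroing).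
import Mathlib
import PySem

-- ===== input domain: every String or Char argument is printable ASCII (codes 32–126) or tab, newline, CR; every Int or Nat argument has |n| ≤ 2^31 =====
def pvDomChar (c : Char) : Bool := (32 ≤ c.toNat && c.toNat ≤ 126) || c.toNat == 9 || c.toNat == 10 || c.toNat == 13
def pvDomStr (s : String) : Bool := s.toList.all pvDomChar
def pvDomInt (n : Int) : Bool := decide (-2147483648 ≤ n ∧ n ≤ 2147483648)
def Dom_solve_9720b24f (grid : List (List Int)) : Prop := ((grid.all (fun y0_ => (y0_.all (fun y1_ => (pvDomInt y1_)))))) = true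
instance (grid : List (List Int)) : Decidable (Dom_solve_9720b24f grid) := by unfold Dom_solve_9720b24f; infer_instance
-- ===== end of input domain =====

-- B restructures A as a staged pipeline: one component-id grid filled by a deque
-- BFS (replacing A's visited array, pop(0) queue and cell→component dict),
-- per-colour cell pools and bounding boxes precomputed once (replacing A's
-- per-candidate recomputation of a colour's union and bbox), a pure classification
-- collecting the cells of doomed components, and a single final erase pass
-- (replacing A's interleaved in-place zeroing). Objective: alternative structure.

-- ===== PORT A =====
-- grid[r][c] / vis[r][c] / out[r][c]: every access A performs is guarded by
-- 0 <= r < R and 0 <= c < C (or lies on the scanned rectangle), so .toNat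
-- indexing with a default is exact there.
def pvCell (g : List (List Int)) (r c : Int) : Int := (g.getD r.toNat []).getD c.toNat 0

def pvGet2 {α : Type} (d : α) (m : List (List α)) (r c : Int) : α := (m.getD r.toNat []).getD c.toNat d

def pvSet2 {α : Type} (m : List (List α)) (r c : Int) (v : α) : List (List α) :=
  m.set r.toNat ((m.getD r.toNat []).set c.toNat v)

def pvNbrs (rc : Int × Int) : List (Int × Int) :=
  [(rc.1 - 1, rc.2), (rc.1 + 1, rc.2), (rc.1, rc.2 - 1), (rc.1, rc.2 + 1)]

-- fuel for A's BFS while-loop: one iteration pops one queue entry, and at most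
-- R*C cells are ever pushed in one BFS, so R*C+1 iterations always drain the queue.
def pvFuel (g : List (List Int)) : Nat := g.length * (g.headD []).length + 1

-- 'for r,c in cells: out[r][c] = 0'
def pvZero (out : List (List Int)) (cells : List (Int × Int)) : List (List Int) :=
  cells.foldl (fun o rc => pvSet2 o rc.1 rc.2 0) out

-- the four min/max of a cell set (nonempty at every use, so .getD 0 never shows)
def pvBB (s : List (Int × Int)) : Int × Int × Int × Int :=
  ((PySem.List.min? (s.map Prod.fst) id).getD 0, (PySem.List.max? (s.map Prod.fst) id).getD 0,
   (PySem.List.min? (s.map Prod.snd) id).getD 0, (PySem.List.max? (s.map Prod.snd) id).getD 0)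

-- all(mr <= r <= Mr and mc <= c <= Mc for r,c in cells)
def pvInBB (bb : Int × Int × Int × Int) (cells : List (Int × Int)) : Bool :=
  cells.all (fun rc => decide (bb.1 ≤ rc.1 ∧ rc.1 ≤ bb.2.1 ∧ bb.2.2.1 ≤ rc.2 ∧ rc.2 ≤ bb.2.2.2))

-- A's colour-count loop over the R×C rectangle
def pvCount (g : List (List Int)) (R C : Int) : PySem.Dict Int Int :=
  (PySem.List.pyRange 0 R 1).foldl
    (fun d r => (PySem.List.pyRange 0 C 1).foldl
      (fun d c => if pvCell g r c ≠ 0 then d.modify (pvCell g r c) 0 (· + 1) else d) d)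
    PySem.Dict.empty

-- body of A's BFS inner 'for nr,nc in ...' loop
def pvBfsStepA (g : List (List Int)) (R C col : Int)
    (s : List (Int × Int) × List (List Bool) × PySem.Set (Int × Int)) (nb : Int × Int) :
    List (Int × Int) × List (List Bool) × PySem.Set (Int × Int) :=
  if 0 ≤ nb.1 ∧ nb.1 < R ∧ 0 ≤ nb.2 ∧ nb.2 < C ∧ pvGet2 false s.2.1 nb.1 nb.2 = false ∧ pvCell g nb.1 nb.2 = col
  then (s.1 ++ [nb], pvSet2 s.2.1 nb.1 nb.2 true, PySem.Set.add s.2.2 nb)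
  else s

-- A's 'while q:' loop (queue as a list, q.pop(0) takes the head)
def pvBfsA (g : List (List Int)) (R C col : Int) :
    Nat → List (Int × Int) → List (List Bool) → PySem.Set (Int × Int) →
    List (List Bool) × PySem.Set (Int × Int)
  | 0, _, vis, cells => (vis, cells)
  | _ + 1, [], vis, cells => (vis, cells)
  | fuel + 1, rc :: q, vis, cells =>
    let st := (pvNbrs rc).foldl (pvBfsStepA g R C col) (q, vis, cells)
    pvBfsA g R C col fuel st.1 st.2.1 st.2.2

abbrev pvStA := List (List Bool) × List (Int × PySem.Set (Int × Int)) × PySem.Dict (Int × Int) Int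

-- body of A's component-scan loop: visited array, components list, cell→component dict
def pvStepA (g : List (List Int)) (R C : Int) (st : pvStA) (r c : Int) : pvStA :=
  if pvCell g r c ≠ 0 ∧ pvGet2 false st.1 r c = false then
    let col := pvCell g r c
    let p := pvBfsA g R C col (pvFuel g) [(r, c)] (pvSet2 st.1 r c true) (PySem.Set.add PySem.Set.empty (r, c))
    let idx : Int := st.2.1.length
    (p.1, st.2.1 ++ [(col, p.2)], p.2.foldl (fun d cell => d.insert cell idx) st.2.2)
  else st

-- A's adjacency collection for one component: dict lookups at the four neighbours
def pvAdjA (dict : PySem.Dict (Int × Int) Int) (idx : Int) (cells : PySem.Set (Int × Int)) : PySem.Set Int :=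
  cells.foldl (fun a rc => (pvNbrs rc).foldl (fun a nb =>
    match dict.get? nb with
    | some j => if j ≠ idx then PySem.Set.add a j else a
    | none => a) a) PySem.Set.empty

-- 'all_ocol = set(); for oi,(oc,ocs) in enumerate(components): if oc==ocol: all_ocol.update(ocs)'
def pvUnionF (allc : List (Int × PySem.Set (Int × Int))) (ocol : Int) : PySem.Set (Int × Int) :=
  allc.foldl (fun s o => if o.1 = ocol then PySem.Set.update s o.2 else s) PySem.Set.empty

-- A's inner loop over candidate enclosing components (recomputes the colour union
-- and its bbox for every candidate; 'break' = stop recursing)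
def pvPhase3A (count : PySem.Dict Int Int) (allc : List (Int × PySem.Set (Int × Int)))
    (col : Int) (cells : PySem.Set (Int × Int)) :
    List (Int × PySem.Set (Int × Int)) → List (List Int) → List (List Int)
  | [], out => out
  | oc :: rest, out =>
    if oc.1 = col then pvPhase3A count allc col cells rest out
    else if count.getD oc.1 0 ≤ count.getD col 0 then pvPhase3A count allc col cells rest out
    else if pvInBB (pvBB (pvUnionF allc oc.1)) cells then pvZero out cells
    else pvPhase3A count allc col cells rest out

-- A's 'for idx,(col,cells) in enumerate(components):' loop mutating out
def pvMainA (count : PySem.Dict Int Int) (dict : PySem.Dict (Int × Int) Int)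
    (allc : List (Int × PySem.Set (Int × Int))) :
    List (Int × PySem.Set (Int × Int)) → Int → List (List Int) → List (List Int)
  | [], _, out => out
  | (col, cells) :: rest, idx, out =>
    let adj := pvAdjA dict idx cells
    let out' :=
      if adj ≠ PySem.Set.empty then
        let acols : PySem.Set Int := PySem.Set.ofList (adj.map (fun i => (PySem.List.pyGetD allc i (0, PySem.Set.empty)).1))
        if acols.length = 1 then
          let acol := PySem.List.pyGetD acols 0 0
          if acol ≠ col ∧ count.getD col 0 < count.getD acol 0 then pvZero out cells else out
        else out
      else pvPhase3A count allc col cells allc out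
    pvMainA count dict allc rest (idx + 1) out'

def solve_9720b24f (grid : List (List Int)) : List (List Int) :=
  let R : Int := grid.length
  let C : Int := (grid.headD []).length
  let count := pvCount grid R C
  let st0 : pvStA := (List.replicate grid.length (List.replicate (grid.headD []).length false), [], PySem.Dict.empty)
  let st := (PySem.List.pyRange 0 R 1).foldl
    (fun st r => (PySem.List.pyRange 0 C 1).foldl (fun st c => pvStepA grid R C st r c) st) st0
  pvMainA count st.2.2 st.2.1 st.2.1 0 grid

-- ===== PORT B =====
-- B's reads are guarded by the same bounds test as the Python ('inside'), so the
-- defaulted indexing is exact; the comp grid doubles as the visited marking.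
abbrev pbG := List (List Int)
abbrev pbC := Int × Int
abbrev pbL := List pbC
abbrev pbB := Int × Int × Int × Int
abbrev pbM := List (Int × pbL)

-- m[i][j] with a default (grid reads use 0, comp-grid reads use -1)
def pbRead (m : pbG) (i j dv : Int) : Int := (m[i.toNat]?.getD []).getD j.toNat dv

def pbWrite (m : pbG) (i j v : Int) : pbG := m.set i.toNat ((m[i.toNat]?.getD []).set j.toNat v)

-- 'def inside(r, c): return 0 <= r < R and 0 <= c < C'
abbrev pbIn (H W i j : Int) : Prop := 0 ≤ i ∧ i < H ∧ 0 ≤ j ∧ j < W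

-- 'range(C)'
def pbCols (W : Int) : List Int := PySem.List.pyRange 0 W 1

-- the four direction vectors '((-1,0),(1,0),(0,-1),(0,1))'
def pbDirs : pbL := [(-1, 0), (1, 0), (0, -1), (0, 1)]

-- port-side fuel for the 'while q:' deque loop (each pop is one iteration; at most
-- R*C cells are ever enqueued, so this always drains the queue)
def pbFuel (w : pbG) : Nat := (w.headD []).length * w.length + 1

-- 'count = Counter(row[c] for row in grid for c in range(C) if row[c] != 0)'
def pbCount (w : pbG) (W : Int) : PySem.Dict Int Int :=
  PySem.Dict.counter (w.flatMap (fun ln =>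
    ((pbCols W).filter (fun j => decide (PySem.List.pyGetD ln j 0 ≠ 0))).map
      (fun j => PySem.List.pyGetD ln j 0)))

-- one guarded extension step of the deque BFS
def pbGrow (w : pbG) (H W hue k : Int) (t : pbG × pbL × pbL) (ni nj : Int) : pbG × pbL × pbL :=
  if pbIn H W ni nj ∧ pbRead t.1 ni nj (-1) = -1 ∧ pbRead w ni nj 0 = hue
  then (pbWrite t.1 ni nj k, t.2.1 ++ [(ni, nj)], t.2.2 ++ [(ni, nj)])
  else t

-- B's 'while q:' deque loop; state = (comp grid, cells, queue)
def pbBfs (w : pbG) (H W hue k : Int) : Nat → pbG → pbL → pbL → pbG × pbL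
  | 0, lbl, cl, _ => (lbl, cl)
  | _ + 1, lbl, cl, [] => (lbl, cl)
  | n + 1, lbl, cl, (pi, pj) :: qu =>
    let t := pbDirs.foldl (fun t dv => pbGrow w H W hue k t (pi + dv.1) (pj + dv.2)) (lbl, cl, qu)
    pbBfs w H W hue k n t.1 t.2.1 t.2.2

-- body of B's component-scan loop over 'enumerate(grid)' rows; row[c] reads the row
def pbStep (w : pbG) (H W : Int) (sc : pbG × pbM) (i : Int) (ln : List Int) (j : Int) : pbG × pbM :=
  let val := PySem.List.pyGetD ln j 0
  if val ≠ 0 ∧ pbRead sc.1 i j (-1) = -1 then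
    let k : Int := sc.2.length
    let fin := pbBfs w H W val k (pbFuel w) (pbWrite sc.1 i j k) [(i, j)] [(i, j)]
    (fin.1, sc.2 ++ [(val, fin.2)])
  else sc

-- 'pool = defaultdict(list); for col, cells in comps: pool[col].extend(cells)'
def pbPool (parts : pbM) : PySem.Dict Int pbL :=
  parts.foldl (fun po e => match e with
    | (hue, cl) => po.insert hue ((po.getD hue []) ++ cl)) PySem.Dict.empty

-- min(...) / max(...) of a generator, with the unreachable-empty default 0
def pbLo (xs : List Int) : Int := (PySem.List.min? xs (fun x => x)).getD 0
def pbHi (xs : List Int) : Int := (PySem.List.max? xs (fun x => x)).getD 0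

-- '(min(r for r,_ in s), max(r for r,_ in s), min(c for _,c in s), max(c for _,c in s))'
def pbRect (u : pbL) : pbB :=
  (pbLo (u.map (fun e => e.1)), pbHi (u.map (fun e => e.1)),
   pbLo (u.map (fun e => e.2)), pbHi (u.map (fun e => e.2)))

-- 'bbox = {col: (...) for col, s in pool.items()}'
def pbBox (parts : pbM) : PySem.Dict Int pbB :=
  (pbPool parts).items.foldl (fun bx e => match e with
    | (hue, u) => bx.insert hue (pbRect u)) PySem.Dict.empty

-- 'all(mr <= r <= Mr and mc <= c <= Mc for r, c in cells)'
def pbWithin (bb : pbB) (cl : pbL) : Bool :=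
  match bb with
  | (mr, Mr, mc, Mc) =>
    cl.all (fun pt => decide (mr ≤ pt.1) && decide (pt.1 ≤ Mr) && decide (mc ≤ pt.2) && decide (pt.2 ≤ Mc))

-- one guarded neighbour-label insertion
def pbNote (w lbl : pbG) (H W k : Int) (z : PySem.Set Int) (ni nj : Int) : PySem.Set Int :=
  if pbIn H W ni nj ∧ pbRead w ni nj 0 ≠ 0 ∧ pbRead lbl ni nj (-1) ≠ k
  then PySem.Set.add z (pbRead lbl ni nj (-1))
  else z

-- B's neighbour-label set, read off the component-id grid
def pbNbrSet (w lbl : pbG) (H W k : Int) (cl : pbL) : PySem.Set Int :=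
  cl.foldl (fun z pt =>
    pbDirs.foldl (fun z dv => pbNote w lbl H W k z (pt.1 + dv.1) (pt.2 + dv.2)) z) PySem.Set.empty

-- pure classification: collect the cells of every doomed component
def pbDead (w lbl : pbG) (H W : Int) (cnt : PySem.Dict Int Int) (parts : pbM) : pbL :=
  let bx := pbBox parts
  (PySem.List.enumerate parts).foldl (fun dd e =>
    match e with
    | (k, hue, cl) =>
      let nbr := pbNbrSet w lbl H W k cl
      if nbr ≠ PySem.Set.empty then
        match PySem.Set.ofList (nbr.map (fun i => (PySem.List.pyGetD parts i (0, [])).1)) with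
        | [ac] =>
          if ac ≠ hue ∧ cnt.getD hue 0 < cnt.getD ac 0 then dd ++ cl else dd
        | _ => dd
      else if bx.items.any (fun e =>
          match e with
          | (oc, bb) => decide (oc ≠ hue) && decide (cnt.getD hue 0 < cnt.getD oc 0) && pbWithin bb cl)
      then dd ++ cl
      else dd) []

-- the final erase pass 'for r, c in dead: out[r][c] = 0'
def pbErase (res : pbG) (dd : pbL) : pbG :=
  dd.foldl (fun res pt => match pt with
    | (i, j) => res.set i.toNat ((res[i.toNat]?.getD []).set j.toNat 0)) res

def solve_9720b24f_alt (grid : List (List Int)) : List (List Int) :=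
  let H : Int := PySem.List.len grid
  let W : Int := PySem.List.len (PySem.List.pyGetD grid 0 [])
  let cnt := pbCount grid W
  let sc := (PySem.List.enumerate grid).foldl
    (fun sc e => match e with
      | (i, ln) => (pbCols W).foldl (fun sc j => pbStep grid H W sc i ln j) sc)
    ((pbCols H).map (fun _ => List.replicate W.toNat (-1)), [])
  pbErase (grid.map (fun ln => ln)) (pbDead grid sc.1 H W cnt sc.2)

-- ===== PRECONDITION & SPEC =====
-- Pre_ excludes exactly the inputs on which A raises: the empty grid (grid[0] is an
-- IndexError) and ragged grids with a row shorter than the first row (grid[r][c]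
-- raises while scanning the R×C rectangle). Rows longer than the first row are kept.
def Pre_solve_9720b24f (grid : List (List Int)) : Prop :=
  grid ≠ [] ∧ ∀ row ∈ grid, (grid.headD []).length ≤ row.length
instance (grid : List (List Int)) : Decidable (Pre_solve_9720b24f grid) := by
  unfold Pre_solve_9720b24f; infer_instance

def pvWitness_solve_9720b24f : List (List Int) := [[1, 0, 2], [0, 2, 2], [1, 0, 2]]

def Spec_solve_9720b24f (grid : List (List Int)) (out : List (List Int)) : Prop := out = solve_9720b24f_alt grid
instance (grid : List (List Int)) (out : List (List Int)) : Decidable (Spec_solve_9720b24f grid out) := by unfold Spec_solve_9720b24f; infer_instance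

-- ===== CLAIM (what is proved, stated in full; the proofs are below) =====
def Claim_equal_solve_9720b24f : Prop := ∀ (grid : List (List Int)), Dom_solve_9720b24f grid → Pre_solve_9720b24f grid → Spec_solve_9720b24f grid (solve_9720b24f grid)

-- ===== LEMMAS AND PROOFS =====

-- proof-layer reference forms of B's loops (pvNbrs/pvGet2-shaped), used only to
-- relate the two ports; they belong to neither port's definition closure.
abbrev pwSt := List (List Int) × List (Int × List (Int × Int))

def pwBfsStep (g : List (List Int)) (R C col idx : Int)
    (s : List (Int × Int) × List (List Int) × List (Int × Int)) (nb : Int × Int) :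
    List (Int × Int) × List (List Int) × List (Int × Int) :=
  if 0 ≤ nb.1 ∧ nb.1 < R ∧ 0 ≤ nb.2 ∧ nb.2 < C ∧ pvGet2 (-1) s.2.1 nb.1 nb.2 = -1 ∧ pvCell g nb.1 nb.2 = col
  then (s.1 ++ [nb], pvSet2 s.2.1 nb.1 nb.2 idx, s.2.2 ++ [nb])
  else s

def pwBfs (g : List (List Int)) (R C col idx : Int) :
    Nat → List (Int × Int) → List (List Int) → List (Int × Int) →
    List (List Int) × List (Int × Int)
  | 0, _, comp, cells => (comp, cells)
  | _ + 1, [], comp, cells => (comp, cells)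
  | fuel + 1, rc :: q, comp, cells =>
    let st := (pvNbrs rc).foldl (pwBfsStep g R C col idx) (q, comp, cells)
    pwBfs g R C col idx fuel st.1 st.2.1 st.2.2

def pwStep (g : List (List Int)) (R C : Int) (st : pwSt) (r c : Int) : pwSt :=
  if pvCell g r c ≠ 0 ∧ pvGet2 (-1) st.1 r c = -1 then
    let col := pvCell g r c
    let idx : Int := st.2.length
    let p := pwBfs g R C col idx (pvFuel g) [(r, c)] (pvSet2 st.1 r c idx) [(r, c)]
    (p.1, st.2 ++ [(col, p.2)])
  else st

def pwAdj (g : List (List Int)) (R C : Int) (comp : List (List Int)) (idx : Int)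
    (cells : List (Int × Int)) : PySem.Set Int :=
  cells.foldl (fun a rc => (pvNbrs rc).foldl (fun a nb =>
    if 0 ≤ nb.1 ∧ nb.1 < R ∧ 0 ≤ nb.2 ∧ nb.2 < C ∧ pvCell g nb.1 nb.2 ≠ 0 ∧ pvGet2 (-1) comp nb.1 nb.2 ≠ idx
    then PySem.Set.add a (pvGet2 (-1) comp nb.1 nb.2) else a) a) PySem.Set.empty

def pwUnionL (allc : List (Int × List (Int × Int))) (ocol : Int) : List (Int × Int) :=
  allc.foldl (fun l o => if o.1 = ocol then l ++ o.2 else l) []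

-- the per-component doom decision, in A's vocabulary
def pwPred (count : PySem.Dict Int Int) (dict : PySem.Dict (Int × Int) Int)
    (allc : List (Int × PySem.Set (Int × Int))) (idx col : Int) (cells : PySem.Set (Int × Int)) : Bool :=
  if pvAdjA dict idx cells ≠ PySem.Set.empty then
    if (PySem.Set.ofList ((pvAdjA dict idx cells).map (fun i => (PySem.List.pyGetD allc i ((0 : Int), ([] : List (Int × Int)))).1))).length = 1 then
      decide (PySem.List.pyGetD (PySem.Set.ofList ((pvAdjA dict idx cells).map (fun i => (PySem.List.pyGetD allc i ((0 : Int), ([] : List (Int × Int)))).1))) 0 0 ≠ col ∧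
        count.getD col 0 < count.getD (PySem.List.pyGetD (PySem.Set.ofList ((pvAdjA dict idx cells).map (fun i => (PySem.List.pyGetD allc i ((0 : Int), ([] : List (Int × Int)))).1))) 0 0) 0)
    else false
  else allc.any (fun oc => decide (¬ oc.1 = col ∧ ¬ count.getD oc.1 0 ≤ count.getD col 0 ∧ pvInBB (pvBB (pvUnionF allc oc.1)) cells = true))

def pwDead (count : PySem.Dict Int Int) (dict : PySem.Dict (Int × Int) Int)
    (allc : List (Int × PySem.Set (Int × Int))) :
    List (Int × PySem.Set (Int × Int)) → Int → List (Int × Int)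
  | [], _ => []
  | (col, cells) :: rest, idx =>
    (if pwPred count dict allc idx col cells then (cells : List (Int × Int)) else []) ++
      pwDead count dict allc rest (idx + 1)

-- in-range predicate for the R×C rectangle
abbrev pvInR (Rn Cn : Nat) (rc : Int × Int) : Prop :=
  0 ≤ rc.1 ∧ rc.1 < (Rn : Int) ∧ 0 ≤ rc.2 ∧ rc.2 < (Cn : Int)

-- exact dimensions of a 2D array
def pvDims {α : Type} (m : List (List α)) (Rn Cn : Nat) : Prop :=
  m.length = Rn ∧ ∀ i (h : i < m.length), m[i].length = Cn

lemma pvDims_replicate {α : Type} (Rn Cn : Nat) (v : α) :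
    pvDims (List.replicate Rn (List.replicate Cn v)) Rn Cn := by
  constructor
  · simp
  · intro i h; simp_all

lemma pvGet2_replicate {α : Type} (d v : α) (Rn Cn : Nat) (r c : Int)
    (h : pvInR Rn Cn (r, c)) :
    pvGet2 d (List.replicate Rn (List.replicate Cn v)) r c = v := by
  obtain ⟨h1, h2, h3, h4⟩ := h
  have hr : r.toNat < Rn := by omega
  have hc : c.toNat < Cn := by omega
  simp [pvGet2, List.getD, hr, hc]

lemma pvDims_set2 {α : Type} (m : List (List α)) (Rn Cn : Nat) (r c : Int) (v : α)
    (hd : pvDims m Rn Cn) : pvDims (pvSet2 m r c v) Rn Cn := by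
  obtain ⟨hl, hrow⟩ := hd
  constructor
  · simp [pvSet2, hl]
  · intro i h
    simp only [pvSet2, List.length_set] at h ⊢
    rw [List.getElem_set]
    split
    · next heq =>
      subst heq
      rcases Nat.lt_or_ge r.toNat m.length with hlt | hge
      · simp [List.getD, List.getElem?_eq_getElem hlt, hrow _ hlt]
      · simp [List.getD, List.getElem?_eq_none (by omega : m.length ≤ r.toNat)] at *
        omega
    · exact hrow _ h

lemma pvGet2_set2 {α : Type} (d : α) (m : List (List α)) (Rn Cn : Nat) (r c r' c' : Int) (v : α)
    (hd : pvDims m Rn Cn) (h : pvInR Rn Cn (r, c)) (h' : pvInR Rn Cn (r', c')) :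
    pvGet2 d (pvSet2 m r c v) r' c' = if r' = r ∧ c' = c then v else pvGet2 d m r' c' := by
  obtain ⟨hl, hrow⟩ := hd
  obtain ⟨a1, a2, a3, a4⟩ := h
  obtain ⟨b1, b2, b3, b4⟩ := h'
  have hr : r.toNat < m.length := by omega
  have hr' : r'.toNat < m.length := by omega
  have hgr : m.getD r.toNat [] = m[r.toNat] := by simp [List.getD, List.getElem?_eq_getElem hr]
  have hrowlen : (m.getD r.toNat []).length = Cn := by rw [hgr]; exact hrow _ hr
  have hcw : c.toNat < (m.getD r.toNat []).length := by omega
  simp only [pvGet2, pvSet2, List.getD, List.getElem?_set]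
  by_cases hrr : r.toNat = r'.toNat
  · rw [if_pos hrr, if_pos hr]
    simp only [Option.getD_some, List.getElem?_set]
    have hcw2 : c.toNat < (m[r.toNat]?.getD []).length := by simpa [List.getD] using hcw
    by_cases hcc : c.toNat = c'.toNat
    · rw [if_pos hcc, if_pos hcw2]
      rw [if_pos ⟨by omega, by omega⟩]
      simp
    · rw [if_neg hcc, if_neg (by omega : ¬ (r' = r ∧ c' = c))]
      rw [show r'.toNat = r.toNat from hrr.symm]
  · rw [if_neg hrr, if_neg (by omega : ¬ (r' = r ∧ c' = c))]

-- a loop inserting every element of l at the same value v: lookup afterwards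
lemma pvGet?_foldl_insert_const (l : List (Int × Int)) (d : PySem.Dict (Int × Int) Int)
    (v : Int) (k : Int × Int) :
    (l.foldl (fun d c => d.insert c v) d).get? k = if k ∈ l then some v else d.get? k := by
  induction l generalizing d with
  | nil => simp
  | cons x xs ih =>
    simp only [List.foldl_cons, ih, List.mem_cons]
    rcases Decidable.em (k ∈ xs) with hm | hm
    · simp [hm]
    · simp only [hm, or_false]
      rw [PySem.Dict.get?_insert]
      by_cases hk : k = x <;> simp [hk]

-- BFS lockstep invariant, relative to the state (vis0, comp0) at the start of the BFS
def pvBfsInv (g : List (List Int)) (Rn Cn : Nat) (col idx : Int)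
    (vis0 : List (List Bool)) (comp0 : List (List Int))
    (vis : List (List Bool)) (comp : List (List Int)) (cells : List (Int × Int)) : Prop :=
  pvDims vis Rn Cn ∧ pvDims comp Rn Cn ∧
  (∀ r c : Int, pvInR Rn Cn (r, c) →
    pvGet2 false vis r c = (pvGet2 false vis0 r c || decide ((r, c) ∈ cells))) ∧
  (∀ r c : Int, pvInR Rn Cn (r, c) →
    pvGet2 (-1) comp r c = if (r, c) ∈ cells then idx else pvGet2 (-1) comp0 r c) ∧
  (∀ k ∈ cells, pvInR Rn Cn k ∧ pvCell g k.1 k.2 = col)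

lemma pvNbrFold_lockstep (g : List (List Int)) (Rn Cn : Nat) (col idx : Int)
    (hidx : 0 ≤ idx)
    (vis0 : List (List Bool)) (comp0 : List (List Int))
    (h0 : ∀ r c : Int, pvInR Rn Cn (r, c) →
      (pvGet2 false vis0 r c = true ↔ pvGet2 (-1) comp0 r c ≠ -1)) :
    ∀ (nbs q : List (Int × Int)) (vis : List (List Bool)) (comp : List (List Int))
      (cells : List (Int × Int)),
    pvBfsInv g Rn Cn col idx vis0 comp0 vis comp cells →
    (nbs.foldl (pvBfsStepA g Rn Cn col) (q, vis, cells)).1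
      = (nbs.foldl (pwBfsStep g Rn Cn col idx) (q, comp, cells)).1 ∧
    (nbs.foldl (pvBfsStepA g Rn Cn col) (q, vis, cells)).2.2
      = (nbs.foldl (pwBfsStep g Rn Cn col idx) (q, comp, cells)).2.2 ∧
    pvBfsInv g Rn Cn col idx vis0 comp0
      (nbs.foldl (pvBfsStepA g Rn Cn col) (q, vis, cells)).2.1
      (nbs.foldl (pwBfsStep g Rn Cn col idx) (q, comp, cells)).2.1
      (nbs.foldl (pwBfsStep g Rn Cn col idx) (q, comp, cells)).2.2 ∧
    ∀ k ∈ cells, k ∈ (nbs.foldl (pwBfsStep g Rn Cn col idx) (q, comp, cells)).2.2 := by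
  intro nbs
  induction nbs with
  | nil =>
    intro q vis comp cells hinv
    exact ⟨rfl, rfl, hinv, fun k hk => hk⟩
  | cons nb rest ih =>
    intro q vis comp cells hinv
    obtain ⟨dv, dc, hv, hc, hcl⟩ := hinv
    simp only [List.foldl_cons]
    have hiff : (0 ≤ nb.1 ∧ nb.1 < (Rn : Int) ∧ 0 ≤ nb.2 ∧ nb.2 < (Cn : Int) ∧
        pvGet2 false vis nb.1 nb.2 = false ∧ pvCell g nb.1 nb.2 = col)
      ↔ (0 ≤ nb.1 ∧ nb.1 < (Rn : Int) ∧ 0 ≤ nb.2 ∧ nb.2 < (Cn : Int) ∧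
        pvGet2 (-1) comp nb.1 nb.2 = -1 ∧ pvCell g nb.1 nb.2 = col) := by
      constructor
      · rintro ⟨g1, g2, g3, g4, g5, g6⟩
        have hInR : pvInR Rn Cn (nb.1, nb.2) := ⟨g1, g2, g3, g4⟩
        rw [hv nb.1 nb.2 hInR] at g5
        rw [Bool.or_eq_false_iff] at g5
        have hnm : (nb.1, nb.2) ∉ cells := by
          intro hm; rw [decide_eq_true hm] at g5; exact Bool.noConfusion g5.2
        have h00 : ¬ pvGet2 (-1) comp0 nb.1 nb.2 ≠ -1 := by
          rw [← h0 nb.1 nb.2 hInR, g5.1]; exact Bool.noConfusion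
        refine ⟨g1, g2, g3, g4, ?_, g6⟩
        rw [hc nb.1 nb.2 hInR, if_neg hnm]
        omega
      · rintro ⟨g1, g2, g3, g4, g5, g6⟩
        have hInR : pvInR Rn Cn (nb.1, nb.2) := ⟨g1, g2, g3, g4⟩
        rw [hc nb.1 nb.2 hInR] at g5
        have hnm : (nb.1, nb.2) ∉ cells := by
          intro hm; rw [if_pos hm] at g5; omega
        rw [if_neg hnm] at g5
        have h00 : pvGet2 false vis0 nb.1 nb.2 = false := by
          rcases Bool.eq_false_or_eq_true (pvGet2 false vis0 nb.1 nb.2) with hb | hb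
          · exact absurd ((h0 nb.1 nb.2 hInR).1 hb) (by omega)
          · exact hb
        refine ⟨g1, g2, g3, g4, ?_, g6⟩
        rw [hv nb.1 nb.2 hInR, h00, Bool.false_or, decide_eq_false hnm]
    by_cases hg : 0 ≤ nb.1 ∧ nb.1 < (Rn : Int) ∧ 0 ≤ nb.2 ∧ nb.2 < (Cn : Int) ∧
        pvGet2 (-1) comp nb.1 nb.2 = -1 ∧ pvCell g nb.1 nb.2 = col
    · obtain ⟨g1, g2, g3, g4, g5, g6⟩ := hg
      have hInR : pvInR Rn Cn (nb.1, nb.2) := ⟨g1, g2, g3, g4⟩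
      have hnm : (nb.1, nb.2) ∉ cells := by
        intro hm; rw [hc nb.1 nb.2 hInR, if_pos hm] at g5; omega
      have hstepA : pvBfsStepA g Rn Cn col (q, vis, cells) nb
          = (q ++ [nb], pvSet2 vis nb.1 nb.2 true, cells ++ [nb]) := by
        rw [pvBfsStepA, if_pos (hiff.2 ⟨g1, g2, g3, g4, g5, g6⟩)]
        simp only [PySem.Set.add_of_not_mem hnm]
      have hstepB : pwBfsStep g Rn Cn col idx (q, comp, cells) nb
          = (q ++ [nb], pvSet2 comp nb.1 nb.2 idx, cells ++ [nb]) := by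
        rw [pwBfsStep, if_pos ⟨g1, g2, g3, g4, g5, g6⟩]
      rw [hstepA, hstepB]
      have hinv' : pvBfsInv g Rn Cn col idx vis0 comp0
          (pvSet2 vis nb.1 nb.2 true) (pvSet2 comp nb.1 nb.2 idx) (cells ++ [nb]) := by
        refine ⟨pvDims_set2 _ _ _ _ _ _ dv, pvDims_set2 _ _ _ _ _ _ dc, ?_, ?_, ?_⟩
        · intro r c hInR'
          rw [pvGet2_set2 _ _ Rn Cn _ _ _ _ _ dv hInR hInR']
          by_cases he : r = nb.1 ∧ c = nb.2
          · rw [if_pos he]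
            have : (r, c) ∈ cells ++ [nb] := by
              simp [List.mem_append, he.1, he.2]
            rw [decide_eq_true this, Bool.or_true]
          · rw [if_neg he, hv r c hInR']
            have : ((r, c) ∈ cells ++ [nb]) ↔ ((r, c) ∈ cells) := by
              simp only [List.mem_append, List.mem_singleton]
              constructor
              · rintro (hm | hm)
                · exact hm
                · exact absurd ⟨congrArg Prod.fst hm, congrArg Prod.snd hm⟩ he
              · exact Or.inl
            rw [decide_eq_decide.mpr this]
        · intro r c hInR'
          rw [pvGet2_set2 _ _ Rn Cn _ _ _ _ _ dc hInR hInR']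
          by_cases he : r = nb.1 ∧ c = nb.2
          · rw [if_pos he, if_pos]
            simp [List.mem_append, he.1, he.2]
          · rw [if_neg he, hc r c hInR']
            have hmm : ((r, c) ∈ cells ++ [nb]) ↔ ((r, c) ∈ cells) := by
              simp only [List.mem_append, List.mem_singleton]
              constructor
              · rintro (hm | hm)
                · exact hm
                · exact absurd ⟨congrArg Prod.fst hm, congrArg Prod.snd hm⟩ he
              · exact Or.inl
            by_cases hm : (r, c) ∈ cells
            · rw [if_pos hm, if_pos (hmm.2 hm)]
            · rw [if_neg hm, if_neg (fun h => hm (hmm.1 h))]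
        · intro k hk
          rcases List.mem_append.1 hk with hk | hk
          · exact hcl k hk
          · rw [List.mem_singleton.1 hk]
            exact ⟨hInR, g6⟩
      obtain ⟨i1, i2, i3, i4⟩ := ih (q ++ [nb]) (pvSet2 vis nb.1 nb.2 true)
        (pvSet2 comp nb.1 nb.2 idx) (cells ++ [nb]) hinv'
      exact ⟨i1, i2, i3, fun k hk => i4 k (List.mem_append.2 (Or.inl hk))⟩
    · have hstepA : pvBfsStepA g Rn Cn col (q, vis, cells) nb = (q, vis, cells) := by
        rw [pvBfsStepA, if_neg (fun h => hg (hiff.1 h))]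
      have hstepB : pwBfsStep g Rn Cn col idx (q, comp, cells) nb = (q, comp, cells) := by
        rw [pwBfsStep, if_neg hg]
      rw [hstepA, hstepB]
      exact ih q vis comp cells ⟨dv, dc, hv, hc, hcl⟩

lemma pvBfs_lockstep (g : List (List Int)) (Rn Cn : Nat) (col idx : Int)
    (hidx : 0 ≤ idx)
    (vis0 : List (List Bool)) (comp0 : List (List Int))
    (h0 : ∀ r c : Int, pvInR Rn Cn (r, c) →
      (pvGet2 false vis0 r c = true ↔ pvGet2 (-1) comp0 r c ≠ -1)) :
    ∀ (fuel : Nat) (q : List (Int × Int)) (vis : List (List Bool)) (comp : List (List Int))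
      (cells : List (Int × Int)),
    pvBfsInv g Rn Cn col idx vis0 comp0 vis comp cells →
    (pvBfsA g Rn Cn col fuel q vis cells).2 = (pwBfs g Rn Cn col idx fuel q comp cells).2 ∧
    pvBfsInv g Rn Cn col idx vis0 comp0
      (pvBfsA g Rn Cn col fuel q vis cells).1
      (pwBfs g Rn Cn col idx fuel q comp cells).1
      (pwBfs g Rn Cn col idx fuel q comp cells).2 ∧
    ∀ k ∈ cells, k ∈ (pwBfs g Rn Cn col idx fuel q comp cells).2 := by
  intro fuel
  induction fuel with
  | zero =>
    intro q vis comp cells hinv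
    exact ⟨rfl, hinv, fun k hk => hk⟩
  | succ fuel ih =>
    intro q vis comp cells hinv
    cases q with
    | nil => exact ⟨rfl, hinv, fun k hk => hk⟩
    | cons rc q' =>
      obtain ⟨hq, hcells, hinv', hsub⟩ :=
        pvNbrFold_lockstep g Rn Cn col idx hidx vis0 comp0 h0 (pvNbrs rc) q' vis comp cells
          ⟨hinv.1, hinv.2.1, hinv.2.2.1, hinv.2.2.2.1, hinv.2.2.2.2⟩
      simp only [pvBfsA, pwBfs]
      rw [hq, hcells]
      obtain ⟨i1, i2, i3⟩ := ih
        ((pvNbrs rc).foldl (pwBfsStep g Rn Cn col idx) (q', comp, cells)).1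
        ((pvNbrs rc).foldl (pvBfsStepA g Rn Cn col) (q', vis, cells)).2.1
        ((pvNbrs rc).foldl (pwBfsStep g Rn Cn col idx) (q', comp, cells)).2.1
        ((pvNbrs rc).foldl (pwBfsStep g Rn Cn col idx) (q', comp, cells)).2.2 hinv'
      exact ⟨i1, i2, fun k hk => i3 k (hsub k hk)⟩

-- scan-phase lockstep invariant between A's (vis, components, dict) and the
-- reference form of B's (comp, components)
def pvScanInv (g : List (List Int)) (Rn Cn : Nat) (stA : pvStA) (stB : pwSt) : Prop :=
  pvDims stA.1 Rn Cn ∧ pvDims stB.1 Rn Cn ∧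
  (∀ r c : Int, pvInR Rn Cn (r, c) →
    (pvGet2 false stA.1 r c = true ↔ pvGet2 (-1) stB.1 r c ≠ -1)) ∧
  stA.2.1 = stB.2 ∧
  (∀ k : Int × Int, pvInR Rn Cn k → pvGet2 (-1) stB.1 k.1 k.2 ≠ -1 →
    stA.2.2.get? k = some (pvGet2 (-1) stB.1 k.1 k.2)) ∧
  (∀ k : Int × Int, ¬ (pvInR Rn Cn k ∧ pvGet2 (-1) stB.1 k.1 k.2 ≠ -1) →
    stA.2.2.get? k = none) ∧
  (∀ r c : Int, pvInR Rn Cn (r, c) → pvGet2 (-1) stB.1 r c ≠ -1 → pvCell g r c ≠ 0)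

lemma pvScan_lockstep (g : List (List Int)) (Rn Cn : Nat) :
    ∀ (pairs : List (Int × Int)) (stA : pvStA) (stB : pwSt),
    pvScanInv g Rn Cn stA stB →
    (∀ p ∈ pairs, pvInR Rn Cn p) →
    pvScanInv g Rn Cn
      (pairs.foldl (fun st p => pvStepA g Rn Cn st p.1 p.2) stA)
      (pairs.foldl (fun st p => pwStep g Rn Cn st p.1 p.2) stB) ∧
    (∀ r c : Int, pvInR Rn Cn (r, c) → pvGet2 (-1) stB.1 r c ≠ -1 →
      pvGet2 (-1) (pairs.foldl (fun st p => pwStep g Rn Cn st p.1 p.2) stB).1 r c ≠ -1) ∧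
    (∀ p ∈ pairs, pvCell g p.1 p.2 ≠ 0 →
      pvGet2 (-1) (pairs.foldl (fun st p => pwStep g Rn Cn st p.1 p.2) stB).1 p.1 p.2 ≠ -1) := by
  intro pairs
  induction pairs with
  | nil =>
    intro stA stB hinv _
    exact ⟨hinv, fun r c _ h => h, by simp⟩
  | cons p rest ih =>
    intro stA stB hinv hps
    obtain ⟨dA, dB, hvc, hcomps, hsome, hnone, hnz⟩ := hinv
    have hInR : pvInR Rn Cn p := hps p (List.mem_cons_self ..)
    have hInR' : pvInR Rn Cn (p.1, p.2) := hInR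
    simp only [List.foldl_cons]
    by_cases hg : pvCell g p.1 p.2 ≠ 0 ∧ pvGet2 (-1) stB.1 p.1 p.2 = -1
    · -- a new component is traversed
      have hgA : pvCell g p.1 p.2 ≠ 0 ∧ pvGet2 false stA.1 p.1 p.2 = false := by
        refine ⟨hg.1, ?_⟩
        rcases Bool.eq_false_or_eq_true (pvGet2 false stA.1 p.1 p.2) with hb | hb
        · exact absurd ((hvc p.1 p.2 hInR').1 hb) (by rw [hg.2]; omega)
        · exact hb
      have hidx : (0 : Int) ≤ (stB.2.length : Int) := by positivity
      have hseedA : PySem.Set.add PySem.Set.empty (p.1, p.2) = [(p.1, p.2)] := rfl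
      have hinv0 : pvBfsInv g Rn Cn (pvCell g p.1 p.2) (stB.2.length : Int) stA.1 stB.1
          (pvSet2 stA.1 p.1 p.2 true) (pvSet2 stB.1 p.1 p.2 (stB.2.length : Int)) [(p.1, p.2)] := by
        refine ⟨pvDims_set2 _ _ _ _ _ _ dA, pvDims_set2 _ _ _ _ _ _ dB, ?_, ?_, ?_⟩
        · intro r c hrc
          rw [pvGet2_set2 _ _ Rn Cn _ _ _ _ _ dA hInR' hrc]
          by_cases he : r = p.1 ∧ c = p.2
          · rw [if_pos he]
            have : (r, c) ∈ [(p.1, p.2)] := by simp [he.1, he.2]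
            rw [decide_eq_true this, Bool.or_true]
          · rw [if_neg he]
            have : ¬ ((r, c) ∈ [(p.1, p.2)]) := by
              intro hmm
              exact he ⟨congrArg Prod.fst (List.mem_singleton.1 hmm),
                congrArg Prod.snd (List.mem_singleton.1 hmm)⟩
            rw [decide_eq_false this, Bool.or_false]
        · intro r c hrc
          rw [pvGet2_set2 _ _ Rn Cn _ _ _ _ _ dB hInR' hrc]
          by_cases he : r = p.1 ∧ c = p.2
          · rw [if_pos he, if_pos (by simp [he.1, he.2])]
          · rw [if_neg he, if_neg]
            intro hmm
            exact he ⟨congrArg Prod.fst (List.mem_singleton.1 hmm),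
              congrArg Prod.snd (List.mem_singleton.1 hmm)⟩
        · intro k hk
          rw [List.mem_singleton.1 hk]
          exact ⟨hInR', rfl⟩
      obtain ⟨hBcells, hinvF, hsubF⟩ :=
        pvBfs_lockstep g Rn Cn (pvCell g p.1 p.2) (stB.2.length : Int) hidx stA.1 stB.1 hvc
          (pvFuel g) [(p.1, p.2)] (pvSet2 stA.1 p.1 p.2 true)
          (pvSet2 stB.1 p.1 p.2 (stB.2.length : Int)) [(p.1, p.2)] hinv0
      obtain ⟨dvF, dcF, hvF, hcF, hclF⟩ := hinvF
      have hseedF : (p.1, p.2) ∈ (pwBfs g Rn Cn (pvCell g p.1 p.2) (stB.2.length : Int)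
          (pvFuel g) [(p.1, p.2)] (pvSet2 stB.1 p.1 p.2 (stB.2.length : Int)) [(p.1, p.2)]).2 :=
        hsubF _ (List.mem_singleton.2 rfl)
      have hstepA : pvStepA g Rn Cn stA p.1 p.2 =
          ((pvBfsA g Rn Cn (pvCell g p.1 p.2) (pvFuel g) [(p.1, p.2)]
              (pvSet2 stA.1 p.1 p.2 true) [(p.1, p.2)]).1,
           stA.2.1 ++ [(pvCell g p.1 p.2,
              (pvBfsA g Rn Cn (pvCell g p.1 p.2) (pvFuel g) [(p.1, p.2)]
                (pvSet2 stA.1 p.1 p.2 true) [(p.1, p.2)]).2)],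
           (pvBfsA g Rn Cn (pvCell g p.1 p.2) (pvFuel g) [(p.1, p.2)]
              (pvSet2 stA.1 p.1 p.2 true) [(p.1, p.2)]).2.foldl
              (fun d cell => d.insert cell (stA.2.1.length : Int)) stA.2.2) := by
        rw [pvStepA, if_pos hgA, hseedA]
      have hstepB : pwStep g Rn Cn stB p.1 p.2 =
          ((pwBfs g Rn Cn (pvCell g p.1 p.2) (stB.2.length : Int) (pvFuel g) [(p.1, p.2)]
              (pvSet2 stB.1 p.1 p.2 (stB.2.length : Int)) [(p.1, p.2)]).1,
           stB.2 ++ [(pvCell g p.1 p.2,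
              (pwBfs g Rn Cn (pvCell g p.1 p.2) (stB.2.length : Int) (pvFuel g) [(p.1, p.2)]
                (pvSet2 stB.1 p.1 p.2 (stB.2.length : Int)) [(p.1, p.2)]).2)]) := by
        rw [pwStep, if_pos hg]
      rw [hstepA, hstepB]
      have hlen : (stA.2.1.length : Int) = (stB.2.length : Int) := by rw [hcomps]
      have hinv' : pvScanInv g Rn Cn
          ((pvBfsA g Rn Cn (pvCell g p.1 p.2) (pvFuel g) [(p.1, p.2)]
              (pvSet2 stA.1 p.1 p.2 true) [(p.1, p.2)]).1,
           stA.2.1 ++ [(pvCell g p.1 p.2,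
              (pvBfsA g Rn Cn (pvCell g p.1 p.2) (pvFuel g) [(p.1, p.2)]
                (pvSet2 stA.1 p.1 p.2 true) [(p.1, p.2)]).2)],
           (pvBfsA g Rn Cn (pvCell g p.1 p.2) (pvFuel g) [(p.1, p.2)]
              (pvSet2 stA.1 p.1 p.2 true) [(p.1, p.2)]).2.foldl
              (fun d cell => d.insert cell (stA.2.1.length : Int)) stA.2.2)
          ((pwBfs g Rn Cn (pvCell g p.1 p.2) (stB.2.length : Int) (pvFuel g) [(p.1, p.2)]
              (pvSet2 stB.1 p.1 p.2 (stB.2.length : Int)) [(p.1, p.2)]).1,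
           stB.2 ++ [(pvCell g p.1 p.2,
              (pwBfs g Rn Cn (pvCell g p.1 p.2) (stB.2.length : Int) (pvFuel g) [(p.1, p.2)]
                (pvSet2 stB.1 p.1 p.2 (stB.2.length : Int)) [(p.1, p.2)]).2)]) := by
        refine ⟨dvF, dcF, ?_, ?_, ?_, ?_, ?_⟩
        · intro r c hrc
          rw [hvF r c hrc, hcF r c hrc]
          by_cases hm : (r, c) ∈ (pwBfs g Rn Cn (pvCell g p.1 p.2) (stB.2.length : Int)
              (pvFuel g) [(p.1, p.2)] (pvSet2 stB.1 p.1 p.2 (stB.2.length : Int)) [(p.1, p.2)]).2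
          · rw [decide_eq_true hm, if_pos hm, Bool.or_true]
            simp only [true_iff]
            omega
          · rw [decide_eq_false hm, if_neg hm, Bool.or_false]
            exact hvc r c hrc
        · show stA.2.1 ++ _ = stB.2 ++ _
          rw [hcomps, hBcells]
        · intro k hrc hne
          show ((pvBfsA g Rn Cn (pvCell g p.1 p.2) (pvFuel g) [(p.1, p.2)]
              (pvSet2 stA.1 p.1 p.2 true) [(p.1, p.2)]).2.foldl
              (fun d cell => d.insert cell (stA.2.1.length : Int)) stA.2.2).get? k = _
          rw [pvGet?_foldl_insert_const, hBcells]
          by_cases hm : k ∈ (pwBfs g Rn Cn (pvCell g p.1 p.2) (stB.2.length : Int)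
              (pvFuel g) [(p.1, p.2)] (pvSet2 stB.1 p.1 p.2 (stB.2.length : Int)) [(p.1, p.2)]).2
          · rw [if_pos hm, hlen]
            have := hcF k.1 k.2 hrc
            rw [if_pos hm] at this
            rw [this]
          · rw [if_neg hm]
            have hval := hcF k.1 k.2 hrc
            rw [if_neg hm] at hval
            rw [hval] at hne ⊢
            exact hsome k hrc hne
        · intro k hkn
          show ((pvBfsA g Rn Cn (pvCell g p.1 p.2) (pvFuel g) [(p.1, p.2)]
              (pvSet2 stA.1 p.1 p.2 true) [(p.1, p.2)]).2.foldl
              (fun d cell => d.insert cell (stA.2.1.length : Int)) stA.2.2).get? k = none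
          rw [pvGet?_foldl_insert_const, hBcells]
          have hm : ¬ k ∈ (pwBfs g Rn Cn (pvCell g p.1 p.2) (stB.2.length : Int)
              (pvFuel g) [(p.1, p.2)] (pvSet2 stB.1 p.1 p.2 (stB.2.length : Int)) [(p.1, p.2)]).2 := by
            intro hm
            obtain ⟨hkr, _⟩ := hclF k hm
            refine hkn ⟨hkr, ?_⟩
            have := hcF k.1 k.2 hkr
            rw [if_pos hm] at this
            rw [this]
            omega
          rw [if_neg hm]
          apply hnone
          intro ⟨hkr, hkv⟩
          have := hcF k.1 k.2 hkr
          rw [if_neg hm] at this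
          exact hkn ⟨hkr, by rw [this]; exact hkv⟩
        · intro r c hrc hne
          have := hcF r c hrc
          by_cases hm : (r, c) ∈ (pwBfs g Rn Cn (pvCell g p.1 p.2) (stB.2.length : Int)
              (pvFuel g) [(p.1, p.2)] (pvSet2 stB.1 p.1 p.2 (stB.2.length : Int)) [(p.1, p.2)]).2
          · obtain ⟨_, hcol⟩ := hclF (r, c) hm
            rw [hcol]
            exact hg.1
          · rw [if_neg hm] at this
            exact hnz r c hrc (by rw [← this]; exact hne)
      obtain ⟨j1, j2, j3⟩ := ih _ _ hinv' (fun q hq => hps q (List.mem_cons_of_mem _ hq))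
      have hpersist : ∀ r c : Int, pvInR Rn Cn (r, c) → pvGet2 (-1) stB.1 r c ≠ -1 →
          pvGet2 (-1) (pwBfs g Rn Cn (pvCell g p.1 p.2) (stB.2.length : Int) (pvFuel g)
            [(p.1, p.2)] (pvSet2 stB.1 p.1 p.2 (stB.2.length : Int)) [(p.1, p.2)]).1 r c ≠ -1 := by
        intro r c hrc hne
        rw [hcF r c hrc]
        by_cases hm : (r, c) ∈ (pwBfs g Rn Cn (pvCell g p.1 p.2) (stB.2.length : Int)
            (pvFuel g) [(p.1, p.2)] (pvSet2 stB.1 p.1 p.2 (stB.2.length : Int)) [(p.1, p.2)]).2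
        · rw [if_pos hm]; omega
        · rw [if_neg hm]; exact hne
      refine ⟨j1, ?_, ?_⟩
      · intro r c hrc hne
        exact j2 r c hrc (hpersist r c hrc hne)
      · intro q hq hqz
        rcases List.mem_cons.1 hq with hq | hq
        · subst hq
          apply j2 q.1 q.2 hInR'
          have hc0 := hcF q.1 q.2 hInR'
          rw [if_pos hseedF] at hc0
          rw [hc0]
          omega
        · exact j3 q hq hqz
    · -- already-visited or empty cell: both steps leave the state unchanged
      have hgA : ¬ (pvCell g p.1 p.2 ≠ 0 ∧ pvGet2 false stA.1 p.1 p.2 = false) := by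
        intro ⟨h1, h2⟩
        apply hg
        refine ⟨h1, ?_⟩
        by_contra hne
        have := (hvc p.1 p.2 hInR').2 hne
        rw [h2] at this
        exact Bool.noConfusion this
      have hstepA : pvStepA g Rn Cn stA p.1 p.2 = stA := by rw [pvStepA, if_neg hgA]
      have hstepB : pwStep g Rn Cn stB p.1 p.2 = stB := by rw [pwStep, if_neg hg]
      rw [hstepA, hstepB]
      obtain ⟨j1, j2, j3⟩ := ih stA stB ⟨dA, dB, hvc, hcomps, hsome, hnone, hnz⟩
        (fun q hq => hps q (List.mem_cons_of_mem _ hq))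
      refine ⟨j1, j2, ?_⟩
      intro q hq hqz
      rcases List.mem_cons.1 hq with hq | hq
      · subst hq
        exact j2 q.1 q.2 hInR' (fun heq => hg ⟨hqz, heq⟩)
      · exact j3 q hq hqz

-- adjacency sets agree once the dict and the component-id grid describe the same labelling
lemma pvAdj_eq (g : List (List Int)) (Rn Cn : Nat) (dict : PySem.Dict (Int × Int) Int)
    (comp : List (List Int)) (idx : Int) (cells : List (Int × Int))
    (hsome : ∀ k : Int × Int, pvInR Rn Cn k → pvGet2 (-1) comp k.1 k.2 ≠ -1 →
      dict.get? k = some (pvGet2 (-1) comp k.1 k.2))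
    (hnone : ∀ k : Int × Int, ¬ (pvInR Rn Cn k ∧ pvGet2 (-1) comp k.1 k.2 ≠ -1) →
      dict.get? k = none)
    (hnz : ∀ r c : Int, pvInR Rn Cn (r, c) → pvGet2 (-1) comp r c ≠ -1 → pvCell g r c ≠ 0)
    (hcov : ∀ r c : Int, pvInR Rn Cn (r, c) → pvCell g r c ≠ 0 → pvGet2 (-1) comp r c ≠ -1) :
    pvAdjA dict idx cells = pwAdj g Rn Cn comp idx cells := by
  unfold pvAdjA pwAdj
  apply PySem.List.foldl_congr_mem
  intro a rc _
  apply PySem.List.foldl_congr_mem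
  intro a nb _
  rcases hgn : dict.get? nb with _ | j
  · have hng : ¬ (0 ≤ nb.1 ∧ nb.1 < (Rn : Int) ∧ 0 ≤ nb.2 ∧ nb.2 < (Cn : Int) ∧
        pvCell g nb.1 nb.2 ≠ 0 ∧ pvGet2 (-1) comp nb.1 nb.2 ≠ idx) := by
      rintro ⟨g1, g2, g3, g4, g5, g6⟩
      have hne := hcov nb.1 nb.2 ⟨g1, g2, g3, g4⟩ g5
      have := hsome nb ⟨g1, g2, g3, g4⟩ hne
      rw [hgn] at this
      simp at this
    rw [if_neg hng]
  · have hIn : pvInR Rn Cn nb ∧ pvGet2 (-1) comp nb.1 nb.2 ≠ -1 := by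
      by_contra hcon
      have := hnone nb hcon
      rw [hgn] at this
      simp at this
    have hj : j = pvGet2 (-1) comp nb.1 nb.2 := by
      have := hsome nb hIn.1 hIn.2
      rw [hgn] at this
      exact Option.some.inj this
    obtain ⟨⟨g1, g2, g3, g4⟩, hne⟩ := hIn
    show (if j ≠ idx then PySem.Set.add a j else a) = _
    by_cases hji : j = idx
    · rw [if_neg (fun h => h hji), if_neg (fun h => h.2.2.2.2.2 (hj ▸ hji))]
    · rw [if_pos hji, if_pos ⟨g1, g2, g3, g4, hnz nb.1 nb.2 ⟨g1, g2, g3, g4⟩ hne, hj ▸ hji⟩, hj]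

-- A's bbox-candidate loop zeroes iff some component's colour qualifies
lemma pvPhase3A_eq_ite (count : PySem.Dict Int Int) (allc : List (Int × PySem.Set (Int × Int)))
    (col : Int) (cells : PySem.Set (Int × Int)) :
    ∀ (comps : List (Int × PySem.Set (Int × Int))) (out : List (List Int)),
    pvPhase3A count allc col cells comps out =
      if comps.any (fun oc => decide (¬ oc.1 = col ∧ ¬ count.getD oc.1 0 ≤ count.getD col 0 ∧
          pvInBB (pvBB (pvUnionF allc oc.1)) cells = true))
      then pvZero out cells else out := by
  intro comps
  induction comps with
  | nil => intro out; simp [pvPhase3A]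
  | cons oc rest ih =>
    intro out
    simp only [pvPhase3A, List.any_cons]
    by_cases h1 : oc.1 = col
    · rw [if_pos h1, ih]
      have hd : decide (¬ oc.1 = col ∧ ¬ count.getD oc.1 0 ≤ count.getD col 0 ∧ pvInBB (pvBB (pvUnionF allc oc.1)) cells = true) = false := decide_eq_false (fun hh => hh.1 h1)
      simp only [hd, Bool.false_or]
    · by_cases h2 : count.getD oc.1 0 ≤ count.getD col 0
      · rw [if_neg h1, if_pos h2, ih]
        have hd : decide (¬ oc.1 = col ∧ ¬ count.getD oc.1 0 ≤ count.getD col 0 ∧ pvInBB (pvBB (pvUnionF allc oc.1)) cells = true) = false := decide_eq_false (fun hh => hh.2.1 h2)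
        simp only [hd, Bool.false_or]
      · by_cases h3 : pvInBB (pvBB (pvUnionF allc oc.1)) cells
        · rw [if_neg h1, if_neg h2, if_pos h3]
          have hd : decide (¬ oc.1 = col ∧ ¬ count.getD oc.1 0 ≤ count.getD col 0 ∧ pvInBB (pvBB (pvUnionF allc oc.1)) cells = true) = true := decide_eq_true ⟨h1, h2, h3⟩
          simp only [hd, Bool.true_or, if_true]
        · rw [if_neg h1, if_neg h2, if_neg h3, ih]
          have hd : decide (¬ oc.1 = col ∧ ¬ count.getD oc.1 0 ≤ count.getD col 0 ∧ pvInBB (pvBB (pvUnionF allc oc.1)) cells = true) = false := decide_eq_false (fun hh => h3 hh.2.2)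
          simp only [hd, Bool.false_or]

-- ----- bridges between B's port-side shapes and the reference forms -----

lemma pbWrite_eq (m : pbG) (r c v : Int) : pbWrite m r c v = pvSet2 m r c v := rfl

lemma pbFuel_eq (g : List (List Int)) : pbFuel g = pvFuel g := by
  simp [pbFuel, pvFuel, Nat.mul_comm]

lemma pbDirs_map (cr cc : Int) :
    pbDirs.map (fun d => (cr + d.1, cc + d.2)) = pvNbrs (cr, cc) := by
  simp [pbDirs, pvNbrs, Prod.ext_iff]
  omega

-- a fold over the four direction vectors is a fold over the four neighbours
lemma pbDirsFold {σ : Type} (cr cc : Int) (F : σ → Int × Int → σ) (init : σ) :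
    pbDirs.foldl (fun s d => F s (cr + d.1, cc + d.2)) init = (pvNbrs (cr, cc)).foldl F init := by
  rw [← pbDirs_map cr cc, List.foldl_map]

lemma pbGrowFold_eq (g : List (List Int)) (R C col idx : Int) :
    ∀ (nbs : List (Int × Int)) (comp : List (List Int)) (cells q : List (Int × Int)),
    nbs.foldl (fun t nb => pbGrow g R C col idx t nb.1 nb.2) (comp, cells, q)
      = ((nbs.foldl (pwBfsStep g R C col idx) (q, comp, cells)).2.1,
         (nbs.foldl (pwBfsStep g R C col idx) (q, comp, cells)).2.2,
         (nbs.foldl (pwBfsStep g R C col idx) (q, comp, cells)).1) := by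
  intro nbs
  induction nbs with
  | nil => intro comp cells q; rfl
  | cons nb rest ih =>
    intro comp cells q
    simp only [List.foldl_cons]
    by_cases hgd : 0 ≤ nb.1 ∧ nb.1 < R ∧ 0 ≤ nb.2 ∧ nb.2 < C ∧
        pvGet2 (-1) comp nb.1 nb.2 = -1 ∧ pvCell g nb.1 nb.2 = col
    · obtain ⟨g1, g2, g3, g4, g5, g6⟩ := hgd
      rw [show pbGrow g R C col idx (comp, cells, q) nb.1 nb.2
            = (pbWrite comp nb.1 nb.2 idx, cells ++ [(nb.1, nb.2)], q ++ [(nb.1, nb.2)]) from by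
          rw [pbGrow, if_pos ⟨⟨g1, g2, g3, g4⟩, g5, g6⟩],
        show pwBfsStep g R C col idx (q, comp, cells) nb
            = (q ++ [nb], pvSet2 comp nb.1 nb.2 idx, cells ++ [nb]) from by
          rw [pwBfsStep, if_pos ⟨g1, g2, g3, g4, g5, g6⟩],
        pbWrite_eq]
      exact ih _ _ _
    · rw [show pbGrow g R C col idx (comp, cells, q) nb.1 nb.2 = (comp, cells, q) from by
          rw [pbGrow, if_neg (fun h => hgd ⟨h.1.1, h.1.2.1, h.1.2.2.1, h.1.2.2.2, h.2.1, h.2.2⟩)],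
        show pwBfsStep g R C col idx (q, comp, cells) nb = (q, comp, cells) from by
          rw [pwBfsStep, if_neg hgd]]
      exact ih _ _ _

lemma pbBfs_eq (g : List (List Int)) (R C col idx : Int) :
    ∀ (fuel : Nat) (comp : List (List Int)) (cells q : List (Int × Int)),
    pbBfs g R C col idx fuel comp cells q = pwBfs g R C col idx fuel q comp cells := by
  intro fuel
  induction fuel with
  | zero => intro comp cells q; rfl
  | succ n ih =>
    intro comp cells q
    cases q with
    | nil => rfl
    | cons rc q' =>
      obtain ⟨cr, cc⟩ := rc
      show pbBfs g R C col idx n _ _ _ = pwBfs g R C col idx n _ _ _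
      rw [show (pbDirs.foldl (fun t dv => pbGrow g R C col idx t (cr + dv.1) (cc + dv.2)) (comp, cells, q'))
          = (pvNbrs (cr, cc)).foldl (fun t nb => pbGrow g R C col idx t nb.1 nb.2) (comp, cells, q') from
            pbDirsFold cr cc (fun t nb => pbGrow g R C col idx t nb.1 nb.2) (comp, cells, q'),
        pbGrowFold_eq]
      exact ih _ _ _

lemma pbStep_eq (g : List (List Int)) (R C : Int) (st : pwSt) (r c : Int)
    (hr : 0 ≤ r) (hc : 0 ≤ c) :
    pbStep g R C st r (PySem.List.pyGetD g r []) c = pwStep g R C st r c := by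
  have hrow : PySem.List.pyGetD g r [] = g.getD r.toNat [] := PySem.List.pyGetD_of_nonneg g [] hr
  have hv : PySem.List.pyGetD (PySem.List.pyGetD g r []) c 0 = pvCell g r c := by
    rw [hrow, PySem.List.pyGetD_of_nonneg _ 0 hc]; rfl
  show (let v := PySem.List.pyGetD (PySem.List.pyGetD g r []) c 0
        if v ≠ 0 ∧ pbRead st.1 r c (-1) = -1 then
          let idx : Int := st.2.length
          let fin := pbBfs g R C v idx (pbFuel g) (pbWrite st.1 r c idx) [(r, c)] [(r, c)]
          (fin.1, st.2 ++ [(v, fin.2)])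
        else st) = pwStep g R C st r c
  rw [show (let v := PySem.List.pyGetD (PySem.List.pyGetD g r []) c 0
        if v ≠ 0 ∧ pbRead st.1 r c (-1) = -1 then
          let idx : Int := st.2.length
          let fin := pbBfs g R C v idx (pbFuel g) (pbWrite st.1 r c idx) [(r, c)] [(r, c)]
          (fin.1, st.2 ++ [(v, fin.2)])
        else st)
      = (if pvCell g r c ≠ 0 ∧ pvGet2 (-1) st.1 r c = -1 then
          ((pbBfs g R C (pvCell g r c) (st.2.length : Int) (pbFuel g)
              (pbWrite st.1 r c (st.2.length : Int)) [(r, c)] [(r, c)]).1,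
           st.2 ++ [(pvCell g r c,
              (pbBfs g R C (pvCell g r c) (st.2.length : Int) (pbFuel g)
                (pbWrite st.1 r c (st.2.length : Int)) [(r, c)] [(r, c)]).2)])
        else st) from by rw [show pbRead st.1 r c (-1) = pvGet2 (-1) st.1 r c from rfl] at *; simp only [hv]]
  rw [pwStep]
  by_cases hg : pvCell g r c ≠ 0 ∧ pvGet2 (-1) st.1 r c = -1
  · rw [if_pos hg, if_pos hg]
    simp only [pbBfs_eq, pbFuel_eq, pbWrite_eq]
  · rw [if_neg hg, if_neg hg]

lemma pbNote_eq (g comp : pbG) (R C idx : Int) (a : PySem.Set Int) (nb : pbC) :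
    pbNote g comp R C idx a nb.1 nb.2
      = (if 0 ≤ nb.1 ∧ nb.1 < R ∧ 0 ≤ nb.2 ∧ nb.2 < C ∧
            pvCell g nb.1 nb.2 ≠ 0 ∧ pvGet2 (-1) comp nb.1 nb.2 ≠ idx
         then PySem.Set.add a (pvGet2 (-1) comp nb.1 nb.2) else a) := by
  rw [pbNote]
  exact if_congr ⟨fun ⟨⟨a1, a2, a3, a4⟩, x, y⟩ => ⟨a1, a2, a3, a4, x, y⟩,
    fun ⟨a1, a2, a3, a4, x, y⟩ => ⟨⟨a1, a2, a3, a4⟩, x, y⟩⟩ rfl rfl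

lemma pbNbrSet_eq (g comp : List (List Int)) (R C idx : Int) (cells : List (Int × Int)) :
    pbNbrSet g comp R C idx cells = pwAdj g R C comp idx cells := by
  unfold pbNbrSet pwAdj
  apply PySem.List.foldl_congr_mem
  intro a rc _
  rw [pbDirsFold rc.1 rc.2 (fun z nb => pbNote g comp R C idx z nb.1 nb.2) a]
  apply PySem.List.foldl_congr_mem
  intro a nb _
  exact pbNote_eq g comp R C idx a nb

-- ----- the colour-count dicts agree -----

lemma pbCondFilter (l : List Int) :
    ∀ d : PySem.Dict Int Int,
    (l.filter (fun v => decide (v ≠ 0))).foldl (fun d v => d.modify v 0 (· + 1)) d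
      = l.foldl (fun d v => if v ≠ 0 then d.modify v 0 (· + 1) else d) d := by
  induction l with
  | nil => intro d; rfl
  | cons v rest ih =>
    intro d
    by_cases hv : v ≠ 0
    · rw [List.filter_cons_of_pos (by simpa using hv), List.foldl_cons, List.foldl_cons,
        if_pos hv, ih]
    · rw [List.filter_cons_of_neg (by simpa using hv), List.foldl_cons, if_neg hv, ih]

lemma pbFlatMapRows {β : Type} (L : List (List Int)) (G : List Int → List β) :
    (PySem.List.pyRange 0 (L.length : Int) 1).flatMap (fun j => G (PySem.List.pyGetD L j [])) = L.flatMap G := by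
  conv_rhs => rw [← PySem.List.map_snd_enumerate L 0]
  rw [show PySem.List.enumerate L 0 = (PySem.List.pyRange 0 (L.length : Int) 1).map
      (fun j => (j, PySem.List.pyGetD L j [])) from PySem.List.enumerate_eq_map_pyRange L []]
  rw [List.map_map, List.flatMap_map]
  rfl

lemma pbCount_eq (grid : List (List Int)) (C : Int) :
    pbCount grid C = pvCount grid (grid.length : Int) C := by
  have hA : pvCount grid (grid.length : Int) C =
      ((PySem.List.pyRange 0 (grid.length : Int) 1).flatMap
        (fun r => (PySem.List.pyRange 0 C 1).map (fun c => pvCell grid r c))).foldl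
        (fun d v => if v ≠ 0 then d.modify v 0 (· + 1) else d) PySem.Dict.empty := by
    rw [List.foldl_flatMap]
    unfold pvCount
    apply PySem.List.foldl_congr_mem
    intro d r _
    rw [List.foldl_map]
  rw [hA]
  unfold pbCount pbCols
  rw [PySem.Dict.counter_eq_foldl]
  have hswap : (fun (row : List Int) =>
      ((PySem.List.pyRange 0 C 1).filter (fun c => decide (PySem.List.pyGetD row c 0 ≠ 0))).map
        (fun c => PySem.List.pyGetD row c 0))
      = (fun (row : List Int) =>
      ((PySem.List.pyRange 0 C 1).map (fun c => PySem.List.pyGetD row c 0)).filter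
        (fun v => decide (v ≠ 0))) := by
    funext row
    simp only [List.filter_map]
    rfl
  rw [hswap, ← List.filter_flatMap, pbCondFilter]
  congr 1
  rw [← pbFlatMapRows grid (fun row => (PySem.List.pyRange 0 C 1).map (fun c => PySem.List.pyGetD row c 0))]
  apply List.flatMap_congr
  intro r hr
  have hr0 : 0 ≤ r := ((PySem.List.mem_pyRange_one).1 hr).1
  apply List.map_eq_map_iff.mpr
  intro c hcm
  have hc0 : 0 ≤ c := ((PySem.List.mem_pyRange_one).1 hcm).1
  rw [PySem.List.pyGetD_of_nonneg _ _ hr0, PySem.List.pyGetD_of_nonneg _ _ hc0]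
  rfl

-- ----- extrema only depend on the element set -----

lemma pbMinCongr (xs ys : List Int) (h : ∀ v, v ∈ xs ↔ v ∈ ys) :
    (PySem.List.min? xs id).getD 0 = (PySem.List.min? ys id).getD 0 := by
  rcases hx : PySem.List.min? xs id with _ | m
  · have hxe : xs = [] := (PySem.List.min?_eq_none_iff xs id).1 hx
    have hye : ys = [] := by
      apply List.eq_nil_iff_forall_not_mem.2
      intro v hv
      exact absurd ((h v).2 hv) (by simp [hxe])
    rw [hye, show PySem.List.min? ([] : List Int) id = none from
      (PySem.List.min?_eq_none_iff _ id).2 rfl]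
  · rcases hy : PySem.List.min? ys id with _ | m'
    · have hye : ys = [] := (PySem.List.min?_eq_none_iff ys id).1 hy
      exact absurd ((h m).1 (PySem.List.min?_mem hx)) (by simp [hye])
    · have h1 : m ≤ m' := PySem.List.min?_isMin hx m' ((h m').2 (PySem.List.min?_mem hy))
      have h2 : m' ≤ m := PySem.List.min?_isMin hy m ((h m).1 (PySem.List.min?_mem hx))
      simp [le_antisymm h1 h2]

lemma pbMaxCongr (xs ys : List Int) (h : ∀ v, v ∈ xs ↔ v ∈ ys) :
    (PySem.List.max? xs id).getD 0 = (PySem.List.max? ys id).getD 0 := by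
  rcases hx : PySem.List.max? xs id with _ | m
  · have hxe : xs = [] := (PySem.List.max?_eq_none_iff xs id).1 hx
    have hye : ys = [] := by
      apply List.eq_nil_iff_forall_not_mem.2
      intro v hv
      exact absurd ((h v).2 hv) (by simp [hxe])
    rw [hye, show PySem.List.max? ([] : List Int) id = none from
      (PySem.List.max?_eq_none_iff _ id).2 rfl]
  · rcases hy : PySem.List.max? ys id with _ | m'
    · have hye : ys = [] := (PySem.List.max?_eq_none_iff ys id).1 hy
      exact absurd ((h m).1 (PySem.List.max?_mem hx)) (by simp [hye])
    · have h1 : m' ≤ m := PySem.List.max?_isMax hx m' ((h m').2 (PySem.List.max?_mem hy))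
      have h2 : m ≤ m' := PySem.List.max?_isMax hy m ((h m).1 (PySem.List.max?_mem hx))
      simp [le_antisymm h2 h1]

lemma pvBB_congr (s t : List (Int × Int)) (h : ∀ x : Int × Int, x ∈ s ↔ x ∈ t) :
    pvBB s = pvBB t := by
  have hf : ∀ v, v ∈ s.map Prod.fst ↔ v ∈ t.map Prod.fst := by
    intro v
    simp only [List.mem_map]
    constructor
    · rintro ⟨x, hx, rfl⟩; exact ⟨x, (h x).1 hx, rfl⟩
    · rintro ⟨x, hx, rfl⟩; exact ⟨x, (h x).2 hx, rfl⟩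
  have hs : ∀ v, v ∈ s.map Prod.snd ↔ v ∈ t.map Prod.snd := by
    intro v
    simp only [List.mem_map]
    constructor
    · rintro ⟨x, hx, rfl⟩; exact ⟨x, (h x).1 hx, rfl⟩
    · rintro ⟨x, hx, rfl⟩; exact ⟨x, (h x).2 hx, rfl⟩
  unfold pvBB
  rw [pbMinCongr _ _ hf, pbMaxCongr _ _ hf, pbMinCongr _ _ hs, pbMaxCongr _ _ hs]

lemma pwUnion_mem (ocol : Int) :
    ∀ (allc : List (Int × PySem.Set (Int × Int))) (s : PySem.Set (Int × Int)) (l : List (Int × Int)),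
    (∀ x, x ∈ s ↔ x ∈ l) →
    ∀ x : Int × Int,
      (x ∈ allc.foldl (fun s o => if o.1 = ocol then PySem.Set.update s o.2 else s) s ↔
       x ∈ allc.foldl (fun l o => if o.1 = ocol then l ++ o.2 else l) l) := by
  intro allc
  induction allc with
  | nil => intro s l h x; simpa using h x
  | cons o rest ih =>
    intro s l h x
    simp only [List.foldl_cons]
    by_cases hc : o.1 = ocol
    · rw [if_pos hc, if_pos hc]
      apply ih
      intro y
      rw [PySem.Set.mem_update, List.mem_append, h y]
    · rw [if_neg hc, if_neg hc]
      exact ih s l h x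

lemma pvUnion_bb (allc : List (Int × PySem.Set (Int × Int))) (ocol : Int) :
    pvBB (pvUnionF allc ocol) = pvBB (pwUnionL allc ocol) := by
  apply pvBB_congr
  exact pwUnion_mem ocol allc PySem.Set.empty [] (by simp [PySem.Set.empty])

-- ----- the pool/bbox dicts describe A's recomputed unions -----

lemma pbPool_getD_gen (ocol : Int) :
    ∀ (comps : List (Int × List (Int × Int))) (d : PySem.Dict Int (List (Int × Int))),
    (comps.foldl (fun d oc => d.insert oc.1 ((d.getD oc.1 []) ++ oc.2)) d).getD ocol []
      = comps.foldl (fun l o => if o.1 = ocol then l ++ o.2 else l) (d.getD ocol []) := by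
  intro comps
  induction comps with
  | nil => intro d; rfl
  | cons oc rest ih =>
    intro d
    simp only [List.foldl_cons]
    rw [ih, PySem.Dict.getD_insert]
    by_cases hc : ocol = oc.1
    · rw [if_pos hc, if_pos hc.symm, hc]
    · rw [if_neg hc, if_neg (fun h => hc h.symm)]

lemma pbPool_getD (comps : List (Int × List (Int × Int))) (ocol : Int) :
    (pbPool comps).getD ocol [] = pwUnionL comps ocol := by
  unfold pbPool pwUnionL
  rw [pbPool_getD_gen]
  simp

lemma pbWithin_eq (bb : Int × Int × Int × Int) (cells : List (Int × Int)) :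
    pbWithin bb cells = pvInBB bb cells := by
  obtain ⟨mr, Mr, mc, Mc⟩ := bb
  show cells.all _ = cells.all _
  congr 1
  funext rc
  simp [Bool.decide_and, Bool.and_assoc]

-- the two existence tests coincide: colours of components = keys of the bbox dict,
-- and the stored bbox of a colour is the bbox of A's recomputed union
lemma pvAny_eq (count : PySem.Dict Int Int) (col : Int) (cells : List (Int × Int))
    (allc : List (Int × List (Int × Int))) :
    (allc.any (fun oc => decide (¬ oc.1 = col ∧ ¬ count.getD oc.1 0 ≤ count.getD col 0 ∧
        pvInBB (pvBB (pvUnionF allc oc.1)) cells = true)))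
    = ((pbBox allc).items.any (fun q =>
        decide (q.1 ≠ col) && decide (count.getD col 0 < count.getD q.1 0) && pbWithin q.2 cells)) := by
  have hfun : (fun q : Int × (Int × Int × Int × Int) =>
      decide (q.1 ≠ col) && decide (count.getD col 0 < count.getD q.1 0) && pbWithin q.2 cells)
      = (fun q : Int × (Int × Int × Int × Int) =>
      decide (q.1 ≠ col ∧ count.getD col 0 < count.getD q.1 0 ∧ pvInBB q.2 cells = true)) := by
    funext q
    rw [pbWithin_eq]
    simp [Bool.decide_and, Bool.and_assoc]
  rw [hfun]
  have hnd : (pbPool allc).keys.Nodup := by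
    unfold pbPool
    exact PySem.Dict.nodup_keys_foldl_insert_key _ _ _ _ (by simp)
  have hkeys : ∀ k : Int, k ∈ (pbPool allc).keys ↔ ∃ oc ∈ allc, oc.1 = k := by
    intro k
    unfold pbPool
    rw [PySem.Dict.keys_foldl_insert_key]
    simp [PySem.Set.mem_update]
  have hitems : (pbBox allc).items
      = (pbPool allc).items.map (fun p => (p.1, pbRect p.2)) := by
    unfold pbBox
    rw [PySem.Dict.items_foldl_insert_fresh _ _ _ _
      (fun a _ => PySem.Dict.contains_empty _) hnd]
    show PySem.Dict.empty.items ++ _ = _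
    rw [show (PySem.Dict.empty : PySem.Dict Int (Int × Int × Int × Int)).items = [] from rfl]
    simp
  rw [hitems, List.any_map, Bool.eq_iff_iff]
  simp only [List.any_eq_true, Function.comp, decide_eq_true_eq]
  constructor
  · rintro ⟨oc, hoc, h1, h2, h3⟩
    have hk : oc.1 ∈ (pbPool allc).keys := (hkeys oc.1).2 ⟨oc, hoc, rfl⟩
    obtain ⟨p, hp, hp1⟩ := List.mem_map.1 hk
    have hval : p.2 = pwUnionL allc p.1 := by
      rw [← pbPool_getD]
      exact (PySem.Dict.getD_of_mem_items _ (show (p.1, p.2) ∈ _ by simpa using hp) hnd _).symm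
    refine ⟨p, hp, ?_, ?_, ?_⟩
    · rw [hp1]; exact h1
    · rw [hp1]; omega
    · show pvInBB (pbRect p.2) cells = true
      rw [show pbRect p.2 = pvBB p.2 from rfl, hval, hp1, ← pvUnion_bb]
      exact h3
  · rintro ⟨p, hp, h1, h2, h3⟩
    have hk : p.1 ∈ (pbPool allc).keys := List.mem_map.2 ⟨p, hp, rfl⟩
    obtain ⟨oc, hoc, hoc1⟩ := (hkeys p.1).1 hk
    have hval : p.2 = pwUnionL allc p.1 := by
      rw [← pbPool_getD]
      exact (PySem.Dict.getD_of_mem_items _ (show (p.1, p.2) ∈ _ by simpa using hp) hnd _).symm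
    refine ⟨oc, hoc, ?_, ?_, ?_⟩
    · rw [hoc1]; exact h1
    · rw [hoc1]; omega
    · rw [hoc1, pvUnion_bb, ← hval]
      exact h3

-- ----- A's main loop produces exactly the zeroing of the doomed cells -----

lemma pvMainA_dead (count : PySem.Dict Int Int) (dict : PySem.Dict (Int × Int) Int)
    (allc : List (Int × PySem.Set (Int × Int))) :
    ∀ (comps : List (Int × PySem.Set (Int × Int))) (idx : Int) (out : List (List Int)),
    pvMainA count dict allc comps idx out = pvZero out (pwDead count dict allc comps idx) := by
  intro comps
  induction comps with
  | nil => intro idx out; rfl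
  | cons hd rest ih =>
    intro idx out
    obtain ⟨col, cells⟩ := hd
    have hout' : (if pvAdjA dict idx cells ≠ PySem.Set.empty then
          (if (PySem.Set.ofList ((pvAdjA dict idx cells).map (fun i => (PySem.List.pyGetD allc i ((0 : Int), ([] : List (Int × Int)))).1))).length = 1 then
            (if PySem.List.pyGetD (PySem.Set.ofList ((pvAdjA dict idx cells).map (fun i => (PySem.List.pyGetD allc i ((0 : Int), ([] : List (Int × Int)))).1))) 0 0 ≠ col ∧
                count.getD col 0 < count.getD (PySem.List.pyGetD (PySem.Set.ofList ((pvAdjA dict idx cells).map (fun i => (PySem.List.pyGetD allc i ((0 : Int), ([] : List (Int × Int)))).1))) 0 0) 0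
             then pvZero out cells else out)
           else out)
        else pvPhase3A count allc col cells allc out)
      = (if pwPred count dict allc idx col cells then pvZero out cells else out) := by
      unfold pwPred
      by_cases h1 : pvAdjA dict idx cells ≠ PySem.Set.empty
      · rw [if_pos h1, if_pos h1]
        by_cases h2 : (PySem.Set.ofList ((pvAdjA dict idx cells).map (fun i => (PySem.List.pyGetD allc i ((0 : Int), ([] : List (Int × Int)))).1))).length = 1
        · rw [if_pos h2, if_pos h2]
          by_cases h3 : PySem.List.pyGetD (PySem.Set.ofList ((pvAdjA dict idx cells).map (fun i => (PySem.List.pyGetD allc i ((0 : Int), ([] : List (Int × Int)))).1))) 0 0 ≠ col ∧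
              count.getD col 0 < count.getD (PySem.List.pyGetD (PySem.Set.ofList ((pvAdjA dict idx cells).map (fun i => (PySem.List.pyGetD allc i ((0 : Int), ([] : List (Int × Int)))).1))) 0 0) 0
          · rw [if_pos h3, if_pos (decide_eq_true h3)]
          · rw [if_neg h3, if_neg (by simp [h3])]
        · rw [if_neg h2, if_neg h2]
          simp
      · rw [if_neg h1, if_neg h1, pvPhase3A_eq_ite]
    show pvMainA count dict allc rest (idx + 1)
        (if pvAdjA dict idx cells ≠ PySem.Set.empty then
          (if (PySem.Set.ofList ((pvAdjA dict idx cells).map (fun i => (PySem.List.pyGetD allc i ((0 : Int), ([] : List (Int × Int)))).1))).length = 1 then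
            (if PySem.List.pyGetD (PySem.Set.ofList ((pvAdjA dict idx cells).map (fun i => (PySem.List.pyGetD allc i ((0 : Int), ([] : List (Int × Int)))).1))) 0 0 ≠ col ∧
                count.getD col 0 < count.getD (PySem.List.pyGetD (PySem.Set.ofList ((pvAdjA dict idx cells).map (fun i => (PySem.List.pyGetD allc i ((0 : Int), ([] : List (Int × Int)))).1))) 0 0) 0
             then pvZero out cells else out)
           else out)
        else pvPhase3A count allc col cells allc out)
      = pvZero out (pwDead count dict allc ((col, cells) :: rest) idx)
    rw [hout', ih]
    rw [show pwDead count dict allc ((col, cells) :: rest) idx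
        = (if pwPred count dict allc idx col cells then (cells : List (Int × Int)) else []) ++
            pwDead count dict allc rest (idx + 1) from rfl]
    unfold pvZero
    rw [List.foldl_append]
    by_cases hp : pwPred count dict allc idx col cells
    · rw [if_pos hp, if_pos hp]
    · rw [if_neg hp, if_neg hp]
      rfl

-- ----- B's classification fold produces the same doomed-cell list -----

lemma pbDead_fold (g : List (List Int)) (R C : Int) (count : PySem.Dict Int Int)
    (dict : PySem.Dict (Int × Int) Int) (comp : List (List Int))
    (allc : List (Int × List (Int × Int)))
    (hAdj : ∀ (idx : Int) (cells : List (Int × Int)),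
      pbNbrSet g comp R C idx cells = pvAdjA dict idx cells) :
    ∀ (l : List (Int × List (Int × Int))) (n : Int) (acc : List (Int × Int)),
    (PySem.List.enumerate l n).foldl (fun dead p =>
      let idx := p.1
      let col := p.2.1
      let cells := p.2.2
      let nbr := pbNbrSet g comp R C idx cells
      if nbr ≠ PySem.Set.empty then
        match PySem.Set.ofList (nbr.map (fun i => (PySem.List.pyGetD allc i (0, [])).1)) with
        | [acol] =>
          if acol ≠ col ∧ count.getD col 0 < count.getD acol 0 then dead ++ cells else dead
        | _ => dead
      else if (pbBox allc).items.any (fun q =>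
          decide (q.1 ≠ col) && decide (count.getD col 0 < count.getD q.1 0) && pbWithin q.2 cells)
      then dead ++ cells
      else dead) acc
    = acc ++ pwDead count dict allc l n := by
  intro l
  induction l with
  | nil => intro n acc; simp [PySem.List.enumerate, pwDead]
  | cons hd rest ih =>
    intro n acc
    obtain ⟨col, cells⟩ := hd
    rw [PySem.List.enumerate_cons, List.foldl_cons, ih (n + 1) _,
      show pwDead count dict allc ((col, cells) :: rest) n
        = (if pwPred count dict allc n col cells then (cells : List (Int × Int)) else []) ++
            pwDead count dict allc rest (n + 1) from rfl,
      ← List.append_assoc]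
    congr 1
    show (if pbNbrSet g comp R C n cells ≠ PySem.Set.empty then
        match PySem.Set.ofList ((pbNbrSet g comp R C n cells).map (fun i => (PySem.List.pyGetD allc i (0, [])).1)) with
        | [acol] =>
          if acol ≠ col ∧ count.getD col 0 < count.getD acol 0 then acc ++ cells else acc
        | _ => acc
      else if (pbBox allc).items.any (fun q =>
          decide (q.1 ≠ col) && decide (count.getD col 0 < count.getD q.1 0) && pbWithin q.2 cells)
      then acc ++ cells
      else acc)
      = acc ++ (if pwPred count dict allc n col cells then (cells : List (Int × Int)) else [])
    rw [hAdj n cells]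
    unfold pwPred
    by_cases h1 : pvAdjA dict n cells ≠ PySem.Set.empty
    · rw [if_pos h1, if_pos h1]
      generalize PySem.Set.ofList ((pvAdjA dict n cells).map (fun i => (PySem.List.pyGetD allc i ((0 : Int), ([] : List (Int × Int)))).1)) = acols
      cases acols with
      | nil => simp
      | cons a tail =>
        cases tail with
        | nil =>
          have hga : PySem.List.pyGetD [a] 0 0 = a := by simp [pysem]
          by_cases h3 : a ≠ col ∧ count.getD col 0 < count.getD a 0
          · simp [hga, h3]
          · simp only [hga, if_true, List.length_cons, List.length_nil]
            rw [if_neg h3, if_neg (by simp [h3]), List.append_nil]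
        | cons b t => simp
    · rw [if_neg h1, if_neg h1, ← pvAny_eq count col cells allc]
      by_cases h4 : (allc.any (fun oc => decide (¬ oc.1 = col ∧ ¬ count.getD oc.1 0 ≤ count.getD col 0 ∧
          pvInBB (pvBB (pvUnionF allc oc.1)) cells = true))) = true
      · rw [if_pos h4, if_pos h4]
      · rw [if_neg h4, if_neg h4, List.append_nil]

-- re-associating the nested scan over rows and columns into one fold over pairs
lemma pvNested_eq_pairs {σ : Type} (R C : Int) (F : σ → Int → Int → σ) (init : σ) :
    ((PySem.List.pyRange 0 R 1).flatMap
        (fun r => (PySem.List.pyRange 0 C 1).map (fun c => (r, c)))).foldl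
        (fun st p => F st p.1 p.2) init
    = (PySem.List.pyRange 0 R 1).foldl
        (fun st r => (PySem.List.pyRange 0 C 1).foldl (fun st c => F st r c) st) init := by
  rw [List.foldl_flatMap]
  simp only [List.foldl_map]

theorem solve_9720b24f_spec : Claim_equal_solve_9720b24f := by
  intro grid _ _
  unfold Spec_solve_9720b24f
  show solve_9720b24f grid = solve_9720b24f_alt grid
  rw [solve_9720b24f, solve_9720b24f_alt]
  have hR : PySem.List.len grid = ((grid.length : Nat) : Int) := by
    simp [PySem.List.len]
  have hC : PySem.List.len (PySem.List.pyGetD grid 0 []) = (((grid.headD []).length : Nat) : Int) := by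
    cases grid <;> simp [pysem, PySem.List.len]
  rw [hR, hC]
  -- B's comp-grid initialiser is the replicate grid
  have hinit : (pbCols ((grid.length : Nat) : Int)).map
        (fun _ => List.replicate ((((grid.headD []).length : Nat) : Int)).toNat (-1 : Int))
      = List.replicate grid.length (List.replicate (grid.headD []).length (-1)) := by
    unfold pbCols
    rw [PySem.List.pyRange_zero_natCast, List.map_map,
      show ((fun (_ : Int) => List.replicate ((((grid.headD []).length : Nat) : Int)).toNat (-1 : Int)) ∘
          fun (k : Nat) => (k : Int))
        = (fun (_ : Nat) => List.replicate ((((grid.headD []).length : Nat) : Int)).toNat (-1 : Int)) from rfl,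
      List.map_const']
    simp
  rw [hinit]
  -- B's row-enumerated scan is the reference nested pyRange scan
  have hBscan : (PySem.List.enumerate grid).foldl
      (fun st p => (pbCols (((grid.headD []).length : Nat) : Int)).foldl
        (fun st c => pbStep grid ((grid.length : Nat) : Int) (((grid.headD []).length : Nat) : Int) st p.1 p.2 c) st)
      (List.replicate grid.length (List.replicate (grid.headD []).length (-1)), [])
      = (PySem.List.pyRange 0 ((grid.length : Nat) : Int) 1).foldl
        (fun st r => (PySem.List.pyRange 0 (((grid.headD []).length : Nat) : Int) 1).foldl
          (fun st c => pwStep grid ((grid.length : Nat) : Int) (((grid.headD []).length : Nat) : Int) st r c) st)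
        (List.replicate grid.length (List.replicate (grid.headD []).length (-1)), []) := by
    unfold pbCols
    rw [show PySem.List.enumerate grid 0 = (PySem.List.pyRange 0 ((grid.length : Nat) : Int) 1).map
        (fun j => (j, PySem.List.pyGetD grid j [])) from PySem.List.enumerate_eq_map_pyRange grid [],
      List.foldl_map]
    apply PySem.List.foldl_congr_mem
    intro st r hr
    have hr0 : 0 ≤ r := ((PySem.List.mem_pyRange_one).1 hr).1
    apply PySem.List.foldl_congr_mem
    intro st c hcm
    have hc0 : 0 ≤ c := ((PySem.List.mem_pyRange_one).1 hcm).1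
    exact pbStep_eq grid _ _ st r c hr0 hc0
  rw [hBscan, pbCount_eq]
  have hA := pvNested_eq_pairs ((grid.length : Nat) : Int) (((grid.headD []).length : Nat) : Int)
    (fun (st : pvStA) (r c : Int) => pvStepA grid (grid.length : Int) ((grid.headD []).length : Int) st r c)
    (List.replicate grid.length (List.replicate (grid.headD []).length false), [], PySem.Dict.empty)
  have hB := pvNested_eq_pairs ((grid.length : Nat) : Int) (((grid.headD []).length : Nat) : Int)
    (fun (st : pwSt) (r c : Int) => pwStep grid (grid.length : Int) ((grid.headD []).length : Int) st r c)
    (List.replicate grid.length (List.replicate (grid.headD []).length (-1)), [])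
  rw [← hA, ← hB]
  set pairs := ((PySem.List.pyRange 0 ((grid.length : Nat) : Int) 1).flatMap
    (fun r => (PySem.List.pyRange 0 (((grid.headD []).length : Nat) : Int) 1).map (fun c => (r, c)))) with hpairs
  have hmem : ∀ p ∈ pairs, pvInR grid.length (grid.headD []).length p := by
    intro p hp
    rw [hpairs] at hp
    obtain ⟨r, hr, hp⟩ := List.mem_flatMap.1 hp
    obtain ⟨c, hc, hp⟩ := List.mem_map.1 hp
    rw [PySem.List.mem_pyRange_one] at hr hc
    rw [← hp]
    exact ⟨hr.1, hr.2, hc.1, hc.2⟩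
  have hinv0 : pvScanInv grid grid.length (grid.headD []).length
      (List.replicate grid.length (List.replicate (grid.headD []).length false), [], PySem.Dict.empty)
      (List.replicate grid.length (List.replicate (grid.headD []).length (-1)), []) := by
    refine ⟨pvDims_replicate _ _ _, pvDims_replicate _ _ _, ?_, rfl, ?_, ?_, ?_⟩
    · intro r c hrc
      rw [pvGet2_replicate _ _ _ _ _ _ hrc, pvGet2_replicate _ _ _ _ _ _ hrc]
      simp
    · intro k hk hne
      rw [pvGet2_replicate _ _ _ _ _ _ hk] at hne
      exact absurd rfl hne
    · intro k _
      exact PySem.Dict.get?_empty k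
    · intro r c hrc hne
      rw [pvGet2_replicate _ _ _ _ _ _ hrc] at hne
      exact absurd rfl hne
  obtain ⟨hinvF, _, hcov'⟩ := pvScan_lockstep grid grid.length (grid.headD []).length pairs _ _ hinv0 hmem
  obtain ⟨_, _, _, hcompsF, hsomeF, hnoneF, hnzF⟩ := hinvF
  have hcovF : ∀ r c : Int, pvInR grid.length (grid.headD []).length (r, c) →
      pvCell grid r c ≠ 0 →
      pvGet2 (-1) (pairs.foldl (fun st p => pwStep grid (grid.length : Int) ((grid.headD []).length : Int) st p.1 p.2)
        (List.replicate grid.length (List.replicate (grid.headD []).length (-1)), [])).1 r c ≠ -1 := by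
    intro r c hrc hnz0
    apply hcov' (r, c) ?_ hnz0
    rw [hpairs]
    apply List.mem_flatMap.2
    refine ⟨r, ?_, List.mem_map.2 ⟨c, ?_, rfl⟩⟩
    · rw [PySem.List.mem_pyRange_one]; exact ⟨hrc.1, hrc.2.1⟩
    · rw [PySem.List.mem_pyRange_one]; exact ⟨hrc.2.2.1, hrc.2.2.2⟩
  set stA := pairs.foldl (fun st p => pvStepA grid (grid.length : Int) ((grid.headD []).length : Int) st p.1 p.2)
    (List.replicate grid.length (List.replicate (grid.headD []).length false), [], PySem.Dict.empty) with hstA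
  set stB := pairs.foldl (fun st p => pwStep grid (grid.length : Int) ((grid.headD []).length : Int) st p.1 p.2)
    (List.replicate grid.length (List.replicate (grid.headD []).length (-1)), []) with hstB
  have hAdj : ∀ (idx : Int) (cells : List (Int × Int)),
      pbNbrSet grid stB.1 ((grid.length : Nat) : Int) (((grid.headD []).length : Nat) : Int) idx cells
        = pvAdjA stA.2.2 idx cells := by
    intro idx cells
    rw [pbNbrSet_eq]
    exact (pvAdj_eq grid grid.length (grid.headD []).length stA.2.2 stB.1 idx cells
      hsomeF hnoneF hnzF hcovF).symm
  -- A's side: the main loop is the zeroing of the doomed cells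
  rw [pvMainA_dead, hcompsF]
  -- B's side: erase of the classified dead list
  rw [show (grid.map (fun row => row)) = grid from List.map_id' grid]
  rw [show pbErase grid (pbDead grid stB.1 ((grid.length : Nat) : Int) (((grid.headD []).length : Nat) : Int)
        (pvCount grid (grid.length : Int) ((grid.headD []).length : Int)) stB.2)
      = pvZero grid (pbDead grid stB.1 ((grid.length : Nat) : Int) (((grid.headD []).length : Nat) : Int)
        (pvCount grid (grid.length : Int) ((grid.headD []).length : Int)) stB.2) from rfl]
  congr 1
  rw [show pbDead grid stB.1 ((grid.length : Nat) : Int) (((grid.headD []).length : Nat) : Int)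
        (pvCount grid (grid.length : Int) ((grid.headD []).length : Int)) stB.2
      = (PySem.List.enumerate stB.2).foldl (fun dead p =>
          let idx := p.1
          let col := p.2.1
          let cells := p.2.2
          let nbr := pbNbrSet grid stB.1 ((grid.length : Nat) : Int) (((grid.headD []).length : Nat) : Int) idx cells
          if nbr ≠ PySem.Set.empty then
            match PySem.Set.ofList (nbr.map (fun i => (PySem.List.pyGetD stB.2 i (0, [])).1)) with
            | [acol] =>
              if acol ≠ col ∧ (pvCount grid (grid.length : Int) ((grid.headD []).length : Int)).getD col 0
                  < (pvCount grid (grid.length : Int) ((grid.headD []).length : Int)).getD acol 0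
              then dead ++ cells else dead
            | _ => dead
          else if (pbBox stB.2).items.any (fun q =>
              decide (q.1 ≠ col) && decide ((pvCount grid (grid.length : Int) ((grid.headD []).length : Int)).getD col 0
                < (pvCount grid (grid.length : Int) ((grid.headD []).length : Int)).getD q.1 0) && pbWithin q.2 cells)
          then dead ++ cells
          else dead) [] from rfl]
  rw [pbDead_fold grid ((grid.length : Nat) : Int) (((grid.headD []).length : Nat) : Int)
    (pvCount grid (grid.length : Int) ((grid.headD []).length : Int)) stA.2.2 stB.1 stB.2 hAdj stB.2 0 []]
  rw [List.nil_append]
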